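-- pv_equiv track=rewrite | github.com/circuitdao/circuit-analytics | circuit_analytics/drivers/protocol_math.py | treasury_withdrawal_amounts
-- ===== SOURCE A (Python) =====
-- def treasury_withdrawal_amounts(nums: list[int], k: int) -> list[int]:
--     """Given list of treasury coin amounts and a withdrawal amount k, returns list of withdrawal amounts for each treasury coin"""
--     # Validate inputs
--     if not nums or k <= 0 or any(n < 0 for n in nums):
--         return []
--     original_sum = sum(nums)
--     if original_sum < k:
--         return []
--
--     # Target sum after subtraction
--     target_sum = original_sum - k
--     if target_sum < 0:
--         return []
--
--     # Create subtrahends list, initially all zeros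
--     subtrahends = [0] * len(nums)
--
--     # Process numbers from largest to smallest
--     remaining_k = k
--
--     # Process while deductions are needed
--     while remaining_k > 0:
--         # Current state
--         current = [nums[i] - subtrahends[i] for i in range(len(nums))]
--
--         # Find distinct values
--         unique_vals = sorted(set(current), reverse=True)
--         if not unique_vals:
--             return []
--
--         # Largest value and next lower value
--         current_val = unique_vals[0]
--         next_val = unique_vals[1] if len(unique_vals) > 1 else 0
--
--         # Indices of elements at current_val, sorted by original value descending
--         indices = [i for i in range(len(current)) if current[i] == current_val]
--         indices.sort(key=lambda i: (-nums[i], i))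
--         count = len(indices)
--
--         # Reduction to next level
--         reduction = current_val - next_val
--         total_reduction = reduction * count
--
--         if total_reduction <= remaining_k:
--             # Reduce all to next_val
--             for idx in indices:
--                 subtrahends[idx] += reduction
--             remaining_k -= total_reduction
--         else:
--             # Distribute remaining_k evenly
--             common_reduction, remainder = divmod(remaining_k, count)
--             assert common_reduction * count + remainder == remaining_k
--             for i, idx in enumerate(indices):
--                 subtrahends[idx] += common_reduction
--                 if i < remainder:
--                     subtrahends[idx] += 1
--             remaining_k -= total_reduction
--
--     # Verify result
--     result = [nums[i] - subtrahends[i] for i in range(len(nums))]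
--     if any(r < 0 for r in result) or sum(result) != target_sum:
--         return []
--
--     return subtrahends
-- ===== SOURCE B (Python) =====
-- def treasury_withdrawal_amounts(nums: list[int], k: int) -> list[int]:
--     """Given list of treasury coin amounts and a withdrawal amount k, returns list of withdrawal amounts for each treasury coin"""
--     if not nums or k <= 0 or any(n < 0 for n in nums) or sum(nums) < k:
--         return []
--     # Sort (index, amount) pairs once: amount descending, index ascending.
--     pairs = sorted(enumerate(nums), key=lambda p: (-p[1], p[0]))
--     n = len(pairs)
--     rem = k        # amount still to withdraw
--     m = 0          # frontier: pairs[:m] are the coins levelled down to `level`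
--     level = pairs[0][1]
--     r = 0          # number of frontier coins that take one extra unit
--     while rem > 0:
--         while m < n and pairs[m][1] == level:
--             m += 1
--         nxt = pairs[m][1] if m < n else 0
--         drop = (level - nxt) * m
--         if drop <= rem:
--             rem -= drop
--             level = nxt
--         else:
--             q, r = divmod(rem, m)
--             level -= q
--             rem = 0
--     sub = [0] * len(nums)
--     for j, (i, v) in enumerate(pairs[:m]):
--         sub[i] = v - level + (1 if j < r else 0)
--     return sub
-- ===== Notes on version B (the rewrite author's own statement) =====
-- stated objective: alternative
-- what changed: A repeatedly rebuilds the current list, its set of distinct values and a freshly sorted index list on every levelling iteration; B sorts (index, amount) pairs once and runs a single moving-frontier sweep over the distinct levels with a closed-form divmod distribution at the final level.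
import Mathlib
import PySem

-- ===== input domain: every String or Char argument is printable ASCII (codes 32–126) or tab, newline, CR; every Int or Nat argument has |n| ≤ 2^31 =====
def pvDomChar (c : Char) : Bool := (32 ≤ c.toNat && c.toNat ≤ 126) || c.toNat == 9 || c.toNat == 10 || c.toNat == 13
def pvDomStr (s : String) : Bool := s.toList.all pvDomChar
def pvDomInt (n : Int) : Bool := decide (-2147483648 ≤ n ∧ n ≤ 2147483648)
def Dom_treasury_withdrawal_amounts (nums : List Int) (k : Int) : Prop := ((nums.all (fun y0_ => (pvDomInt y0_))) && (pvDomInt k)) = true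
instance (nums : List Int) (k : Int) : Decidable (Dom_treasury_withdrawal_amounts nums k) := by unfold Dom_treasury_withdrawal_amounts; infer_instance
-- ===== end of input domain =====

-- B replaces A's per-iteration rebuild-and-re-sort water-fill loop by one sort of (index, amount)
-- pairs plus a single moving-frontier sweep over distinct levels (objective: alternative algorithm).


-- ===== PORT A =====
-- 'subtrahends[idx] += c'
def pvSubUpd (acc : List Int) (idx c : Int) : List Int :=
  PySem.List.pySetD acc idx (PySem.List.pyGetD acc idx 0 + c)

-- 'current = [nums[i] - subtrahends[i] for i in range(len(nums))]' (also A's final 'result')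
def pvAcurrent (nums s : List Int) : List Int :=
  (PySem.List.pyRange 0 (PySem.List.len nums)).map
    (fun i => PySem.List.pyGetD nums i 0 - PySem.List.pyGetD s i 0)

-- 'unique_vals = sorted(set(current), reverse=True)'
def pvAunique (nums s : List Int) : List Int :=
  PySem.List.sorted (PySem.Set.ofList (pvAcurrent nums s)) (fun v => v) true

-- 'current_val = unique_vals[0]'
def pvAcv (nums s : List Int) : Int := PySem.List.pyGetD (pvAunique nums s) 0 0

-- 'next_val = unique_vals[1] if len(unique_vals) > 1 else 0'
def pvAnv (nums s : List Int) : Int :=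
  if 1 < (pvAunique nums s).length then PySem.List.pyGetD (pvAunique nums s) 1 0 else 0

-- 'indices = [i for i in range(len(current)) if current[i] == current_val]; indices.sort(key=...)'
def pvAidx (nums s : List Int) : List Int :=
  PySem.List.sorted2
    ((PySem.List.pyRange 0 (PySem.List.len (pvAcurrent nums s))).filter
      (fun i => PySem.List.pyGetD (pvAcurrent nums s) i 0 == pvAcv nums s))
    (fun i => -(PySem.List.pyGetD nums i 0)) (fun i => i)

-- 'reduction = current_val - next_val'
def pvAred (nums s : List Int) : Int := pvAcv nums s - pvAnv nums s

-- 'total_reduction = reduction * count'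
def pvAtotred (nums s : List Int) : Int :=
  pvAred nums s * PySem.List.len (pvAidx nums s)

-- 'for idx in indices: subtrahends[idx] += reduction'
def pvAupdate (nums s : List Int) : List Int :=
  (pvAidx nums s).foldl (fun acc idx => pvSubUpd acc idx (pvAred nums s)) s

-- 'for i, idx in enumerate(indices): subtrahends[idx] += common_reduction; if i < remainder: ... += 1'
def pvAdistribute (nums s : List Int) (q rm : Int) : List Int :=
  (PySem.List.enumerate (pvAidx nums s)).foldl
    (fun acc p => let acc1 := pvSubUpd acc p.2 q; if p.1 < rm then pvSubUpd acc1 p.2 1 else acc1) s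

-- A's 'while remaining_k > 0' loop; 'none' = the early 'return []' inside the loop.
def pvAloop (nums s : List Int) (rem : Int) : Option (List Int) :=
  if rem ≤ 0 then some s
  else if pvAunique nums s = [] then none
  -- totality guard: when total_reduction ≤ 0 the Python loop never terminates; unreachable in A's reachable states
  else if pvAtotred nums s ≤ 0 then some s
  else if pvAtotred nums s ≤ rem then
    pvAloop nums (pvAupdate nums s) (rem - pvAtotred nums s)
  else
    match PySem.Int.divmod? rem (PySem.List.len (pvAidx nums s)) with
    | none => none -- unreachable: count ≠ 0 in this branch
    | some qr => pvAloop nums (pvAdistribute nums s qr.1 qr.2) (rem - pvAtotred nums s)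
termination_by rem.toNat
decreasing_by all_goals omega

def treasury_withdrawal_amounts (nums : List Int) (k : Int) : List Int :=
  if nums = [] ∨ k ≤ 0 ∨ nums.any (fun v => v < 0) then []
  else if nums.sum < k then []
  else if nums.sum - k < 0 then []
  else
    match pvAloop nums (PySem.List.pyRepeat [(0 : Int)] (PySem.List.len nums)) k with
    | none => []
    | some s =>
      -- 'result = [nums[i] - subtrahends[i] for i in range(len(nums))]' is the same comprehension as 'current'
      if (pvAcurrent nums s).any (fun r => r < 0) ∨ (pvAcurrent nums s).sum ≠ nums.sum - k then []
      else s

-- ===== PORT B =====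
-- B's inner 'while m < n and pairs[m][1] == level: m += 1'
def pvExtend (pairs : List (Int × Int)) (level : Int) (m : Nat) : Nat :=
  if h : m < pairs.length then
    if pairs[m].2 == level then pvExtend pairs level (m + 1) else m
  else m
termination_by pairs.length - m

-- 'nxt = pairs[m][1] if m < n else 0' (after the inner while)
def pvBnxt (pairs : List (Int × Int)) (level : Int) (m : Nat) : Int :=
  if h : pvExtend pairs level m < pairs.length then (pairs[pvExtend pairs level m]'h).2 else 0

-- 'drop = (level - nxt) * m'
def pvBdrop (pairs : List (Int × Int)) (level : Int) (m : Nat) : Int :=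
  (level - pvBnxt pairs level m) * (pvExtend pairs level m : Int)

-- B's outer 'while rem > 0' loop; returns (m, level, r).
def pvBloop (pairs : List (Int × Int)) (m : Nat) (level rem r : Int) : Nat × Int × Int :=
  if rem ≤ 0 then (m, level, r)
  else if pvBdrop pairs level m ≤ rem then
    -- totality guard: when drop ≤ 0 the Python loop never terminates; unreachable (pairs is sorted descending)
    if pvBdrop pairs level m ≤ 0 then (pvExtend pairs level m, level, r)
    else pvBloop pairs (pvExtend pairs level m) (pvBnxt pairs level m)
      (rem - pvBdrop pairs level m) r
  else
    match PySem.Int.divmod? rem (pvExtend pairs level m : Int) with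
    | none => (pvExtend pairs level m, level, r) -- unreachable: m ≥ 1 in this branch
    | some qr => (pvExtend pairs level m, level - qr.1, qr.2)
termination_by rem.toNat
decreasing_by all_goals omega

-- 'pairs = sorted(enumerate(nums), key=lambda p: (-p[1], p[0]))'
def pvPairs (nums : List Int) : List (Int × Int) :=
  PySem.List.sorted2 (PySem.List.enumerate nums) (fun p => -p.2) (fun p => p.1)

-- B's final 'sub = [0]*len(nums); for j, (i, v) in enumerate(pairs[:m]): sub[i] = ...'
def pvBuild (nums : List Int) (m : Nat) (level r : Int) : List Int :=
  (PySem.List.enumerate (PySem.List.slice (pvPairs nums) none (some (m : Int)))).foldl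
    (fun acc p => PySem.List.pySetD acc p.2.1 (p.2.2 - level + (if p.1 < r then 1 else 0)))
    (PySem.List.pyRepeat [(0 : Int)] (PySem.List.len nums))

def treasury_withdrawal_amounts_alt (nums : List Int) (k : Int) : List Int :=
  if nums = [] ∨ k ≤ 0 ∨ nums.any (fun v => v < 0) ∨ nums.sum < k then []
  else
    -- pairs[0][1]: in range since nums ≠ []
    pvBuild nums
      (pvBloop (pvPairs nums) 0 (PySem.List.pyGetD (pvPairs nums) 0 (0, 0)).2 k 0).1
      (pvBloop (pvPairs nums) 0 (PySem.List.pyGetD (pvPairs nums) 0 (0, 0)).2 k 0).2.1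
      (pvBloop (pvPairs nums) 0 (PySem.List.pyGetD (pvPairs nums) 0 (0, 0)).2 k 0).2.2

-- ===== PRECONDITION & SPEC =====
def Spec_treasury_withdrawal_amounts (nums : List Int) (k : Int) (out : List Int) : Prop := out = treasury_withdrawal_amounts_alt nums k
instance (nums : List Int) (k : Int) (out : List Int) : Decidable (Spec_treasury_withdrawal_amounts nums k out) := by unfold Spec_treasury_withdrawal_amounts; infer_instance

-- ===== CLAIM (what is proved, stated in full; the proofs are below) =====
def Claim_equal_treasury_withdrawal_amounts : Prop := ∀ (nums : List Int) (k : Int), Dom_treasury_withdrawal_amounts nums k → Spec_treasury_withdrawal_amounts nums k (treasury_withdrawal_amounts nums k)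

-- ===== LEMMAS AND PROOFS =====

theorem pv_insertBy_pairwise {α : Type} (before : α → α → Bool)
    (hasym : ∀ a b, before a b = true → before b a = false)
    (htrans : ∀ a b c, before b a = false → before c b = false → before c a = false)
    (x : α) (ys : List α) (hp : ys.Pairwise (fun a b => before b a = false)) :
    (PySem.List.insertBy before x ys).Pairwise (fun a b => before b a = false) := by
  induction ys with
  | nil => simp [PySem.List.insertBy]
  | cons y ys ih =>
    rw [List.pairwise_cons] at hp
    obtain ⟨hy, hp⟩ := hp
    by_cases h : before x y = true
    · simp only [PySem.List.insertBy, h, if_true]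
      refine List.Pairwise.cons ?_ (List.Pairwise.cons hy hp)
      intro z hz
      rw [List.mem_cons] at hz
      rcases hz with rfl | hz
      · exact hasym _ _ h
      · exact htrans _ _ _ (hasym _ _ h) (hy z hz)
    · simp only [PySem.List.insertBy, h, if_false]
      refine List.Pairwise.cons ?_ (ih hp)
      intro z hz
      rw [PySem.List.mem_insertBy] at hz
      rcases hz with rfl | hz
      · simpa using h
      · exact hy z hz

theorem pv_foldl_insertBy_pairwise {α : Type} (before : α → α → Bool)
    (hasym : ∀ a b, before a b = true → before b a = false)
    (htrans : ∀ a b c, before b a = false → before c b = false → before c a = false)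
    (xs acc : List α) (hacc : acc.Pairwise (fun a b => before b a = false)) :
    (xs.foldl (fun acc x => PySem.List.insertBy before x acc) acc).Pairwise
      (fun a b => before b a = false) := by
  induction xs generalizing acc with
  | nil => exact hacc
  | cons x xs ih => exact ih _ (pv_insertBy_pairwise before hasym htrans x acc hacc)

theorem pv_eq_of_perm_of_pairwise {α : Type} (wk st : α → α → Prop)
    (hcompat : ∀ a b, wk a b → ¬ st b a) :
    ∀ (l2 l1 : List α), l1.Perm l2 → l1.Pairwise wk → l2.Pairwise st → l1 = l2 := by
  intro l2
  induction l2 with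
  | nil => intro l1 hp _ _; exact hp.eq_nil
  | cons y t ih =>
    intro l1 hp h1 h2
    rcases l1 with _ | ⟨x, s⟩
    · exact absurd hp.symm (by simp)
    by_cases hxy : x = y
    · subst hxy
      rw [ih s hp.cons_inv h1.tail h2.tail]
    · exfalso
      have hy : y ∈ s := by
        have : y ∈ x :: s := hp.mem_iff.mpr (by simp)
        rw [List.mem_cons] at this
        rcases this with h | h
        · exact absurd h.symm hxy
        · exact h
      have hx : x ∈ t := by
        have : x ∈ y :: t := hp.mem_iff.mp (by simp)
        rw [List.mem_cons] at this
        rcases this with h | h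
        · exact absurd h hxy
        · exact h
      exact hcompat x y (List.rel_of_pairwise_cons h1 hy) (List.rel_of_pairwise_cons h2 hx)

theorem pv_sorted2_eq {α : Type} (k1 k2 : α → Int) (xs ys : List α)
    (hperm : ys.Perm xs)
    (hst : ys.Pairwise (fun a b => k1 a < k1 b ∨ (k1 a = k1 b ∧ k2 a < k2 b))) :
    PySem.List.sorted2 xs k1 k2 false = ys := by
  set before : α → α → Bool :=
    fun a b => decide (k1 a < k1 b) || (!decide (k1 b < k1 a) && decide (k2 a < k2 b)) with hbef
  have hasym : ∀ a b, before a b = true → before b a = false := by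
    intro a b h
    simp only [hbef, Bool.or_eq_true, Bool.and_eq_true, Bool.not_eq_true', decide_eq_true_eq,
      decide_eq_false_iff_not, Bool.or_eq_false_iff, Bool.and_eq_false_iff,
      Bool.not_eq_false', Bool.not_eq_true] at *
    constructor
    · omega
    · by_cases hlt : k1 a < k1 b
      · left; simpa using hlt
      · right; simp only [decide_eq_false_iff_not, not_lt]; omega
  have htrans : ∀ a b c, before b a = false → before c b = false → before c a = false := by
    intro a b c h1 h2
    simp only [hbef, Bool.or_eq_false_iff, Bool.and_eq_false_iff, Bool.not_eq_false',
      decide_eq_false_iff_not, decide_eq_true_eq, not_lt] at *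
    obtain ⟨hb1, hb2⟩ := h1
    obtain ⟨hc1, hc2⟩ := h2
    refine ⟨by omega, ?_⟩
    rcases hb2 with h | h
    · left; omega
    · rcases hc2 with h' | h'
      · left; omega
      · by_cases hk : k1 a ≤ k1 c
        · right; omega
        · left; omega
  have hsorted : (PySem.List.sorted2 xs k1 k2 false).Pairwise (fun a b => before b a = false) := by
    unfold PySem.List.sorted2
    simp only [if_neg (by simp : ¬ (false = true))]
    exact pv_foldl_insertBy_pairwise before hasym htrans xs [] (by simp)
  have hperm2 : (PySem.List.sorted2 xs k1 k2 false).Perm ys :=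
    (PySem.List.sorted2_perm xs k1 k2 false).trans hperm.symm
  refine pv_eq_of_perm_of_pairwise (fun a b => before b a = false)
    (fun a b => k1 a < k1 b ∨ (k1 a = k1 b ∧ k2 a < k2 b)) ?_ ys _ hperm2 hsorted hst
  intro a b hwk hst'
  simp only [hbef, Bool.or_eq_false_iff, Bool.and_eq_false_iff, Bool.not_eq_false',
    decide_eq_false_iff_not, decide_eq_true_eq, not_lt] at hwk
  obtain ⟨w1, w2⟩ := hwk
  rcases hst' with h | ⟨h1', h2'⟩
  · omega
  · rcases w2 with h | h
    · omega
    · omega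

-- ---------- pairs facts ----------
theorem pv_sorted2_pairwise {α : Type} (k1 k2 : α → Int) (xs : List α) :
    (PySem.List.sorted2 xs k1 k2 false).Pairwise
      (fun a b => k1 a ≤ k1 b ∧ (k1 a < k1 b ∨ k2 a ≤ k2 b)) := by
  have h := pv_foldl_insertBy_pairwise
    (fun a b => decide (k1 a < k1 b) || (!decide (k1 b < k1 a) && decide (k2 a < k2 b)))
    (by intro a b h
        simp only [Bool.or_eq_true, Bool.and_eq_true, Bool.not_eq_true', decide_eq_true_eq,
          decide_eq_false_iff_not, Bool.or_eq_false_iff, Bool.and_eq_false_iff] at *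
        constructor
        · omega
        · by_cases hlt : k1 a < k1 b
          · left; simpa using hlt
          · right; simp only [decide_eq_false_iff_not, not_lt]; omega)
    (by intro a b c h1 h2
        simp only [Bool.or_eq_false_iff, Bool.and_eq_false_iff, Bool.not_eq_false',
          decide_eq_false_iff_not, decide_eq_true_eq, not_lt] at *
        obtain ⟨hb1, hb2⟩ := h1
        obtain ⟨hc1, hc2⟩ := h2
        refine ⟨by omega, ?_⟩
        rcases hb2 with h | h
        · left; omega
        · rcases hc2 with h' | h'
          · left; omega
          · by_cases hk : k1 a ≤ k1 c
            · right; omega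
            · left; omega)
    xs [] (by simp)
  unfold PySem.List.sorted2
  simp only [if_neg (by simp : ¬ (false = true))]
  refine h.imp ?_
  intro a b hab
  simp only [Bool.or_eq_false_iff, Bool.and_eq_false_iff, Bool.not_eq_false',
    decide_eq_false_iff_not, decide_eq_true_eq, not_lt] at hab
  obtain ⟨h1, h2⟩ := hab
  refine ⟨h1, ?_⟩
  rcases h2 with h | h
  · left; omega
  · right; omega

theorem pv_pairs_perm (nums : List Int) : (pvPairs nums).Perm (PySem.List.enumerate nums) :=
  PySem.List.sorted2_perm _ _ _ _

theorem pv_enumerate_explicit (nums : List Int) :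
    PySem.List.enumerate nums
      = (PySem.List.pyRange 0 (PySem.List.len nums)).map (fun j => (j, PySem.List.pyGetD nums j 0)) :=
  PySem.List.enumerate_eq_map_pyRange nums 0

theorem pv_mem_pairs (nums : List Int) (p : Int × Int) (hp : p ∈ pvPairs nums) :
    0 ≤ p.1 ∧ p.1 < (nums.length : Int) ∧ PySem.List.pyGetD nums p.1 0 = p.2 := by
  have h := (pv_pairs_perm nums).mem_iff.mp hp
  rw [pv_enumerate_explicit] at h
  simp only [List.mem_map] at h
  obtain ⟨j, hj, rfl⟩ := h
  rw [PySem.List.mem_pyRange_one] at hj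
  simp only [PySem.List.len_eq] at hj
  exact ⟨hj.1, hj.2, rfl⟩

theorem pv_pairs_fst_nodup (nums : List Int) : ((pvPairs nums).map Prod.fst).Nodup := by
  have h : ((pvPairs nums).map Prod.fst).Perm ((PySem.List.enumerate nums).map Prod.fst) :=
    (pv_pairs_perm nums).map _
  refine h.nodup_iff.mpr ?_
  rw [pv_enumerate_explicit, List.map_map]
  have : (Prod.fst ∘ fun j => (j, PySem.List.pyGetD nums j 0)) = id := rfl
  rw [this, List.map_id]
  exact PySem.List.nodup_pyRange_one 0 _

theorem pv_pairs_pairwise_lex (nums : List Int) :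
    (pvPairs nums).Pairwise (fun p q => -p.2 < -q.2 ∨ (-p.2 = -q.2 ∧ p.1 < q.1)) := by
  have h1 := pv_sorted2_pairwise (fun p : Int × Int => -p.2) (fun p => p.1) (PySem.List.enumerate nums)
  have h2 : (pvPairs nums).Pairwise (fun p q : Int × Int => p.1 ≠ q.1) :=
    (List.pairwise_map.mp (pv_pairs_fst_nodup nums))
  have h1' : (pvPairs nums).Pairwise
      (fun p q : Int × Int => -p.2 ≤ -q.2 ∧ (-p.2 < -q.2 ∨ p.1 ≤ q.1)) := h1
  refine (h1'.and h2).imp ?_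
  rintro p q ⟨⟨ha, hb⟩, hc⟩
  rcases hb with h | h
  · left; exact h
  · by_cases he : -p.2 = -q.2
    · right; exact ⟨he, lt_of_le_of_ne h hc⟩
    · left; omega

theorem pv_pairs_desc (nums : List Int) :
    (pvPairs nums).Pairwise (fun p q => q.2 ≤ p.2) := by
  refine (pv_pairs_pairwise_lex nums).imp ?_
  rintro p q (h | ⟨h, _⟩) <;> omega

theorem pv_pairs_length (nums : List Int) : (pvPairs nums).length = nums.length := by
  rw [(pv_pairs_perm nums).length_eq, pv_enumerate_explicit, List.length_map,
    PySem.List.length_pyRange_one]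
  simp [PySem.List.len_eq]

theorem pv_pairs_snd_perm (nums : List Int) : ((pvPairs nums).map Prod.snd).Perm nums := by
  refine ((pv_pairs_perm nums).map _).trans ?_
  rw [pv_enumerate_explicit, List.map_map]
  have : ((fun p : Int × Int => p.2) ∘ fun j => (j, PySem.List.pyGetD nums j 0))
      = fun j => PySem.List.pyGetD nums j 0 := rfl
  rw [this, PySem.List.map_pyGetD_pyRange_zero]

-- ---------- counting in a value-descending pair list ----------
theorem pv_desc_getElem_iff (g : Int × Int → Bool)
    (hmono : ∀ p q : Int × Int, q.2 ≤ p.2 → g q = true → g p = true) :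
    ∀ (l : List (Int × Int)), l.Pairwise (fun p q => q.2 ≤ p.2) →
      ∀ (j : Nat) (hj : j < l.length), (g l[j] = true ↔ j < l.countP g) := by
  intro l
  induction l with
  | nil => intro _ j hj; simp at hj
  | cons p t ih =>
    intro hd j hj
    rw [List.pairwise_cons] at hd
    obtain ⟨hp, ht⟩ := hd
    by_cases hgp : g p = true
    · rw [List.countP_cons_of_pos hgp]
      cases j with
      | zero => simpa using hgp
      | succ j =>
        simp only [List.getElem_cons_succ]
        rw [ih ht j (by simpa using hj)]
        omega
    · have hz : t.countP g = 0 := by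
        rw [List.countP_eq_zero]
        intro q hq
        intro hgq
        exact hgp (hmono p q (hp q hq) hgq)
      rw [List.countP_cons_of_neg hgp, hz]
      cases j with
      | zero => simpa using hgp
      | succ j =>
        simp only [List.getElem_cons_succ]
        constructor
        · intro hgt
          exact absurd (hmono p _ (hp _ (List.getElem_mem _)) hgt) hgp
        · omega

theorem pv_desc_take_countP (g : Int × Int → Bool)
    (hmono : ∀ p q : Int × Int, q.2 ≤ p.2 → g q = true → g p = true) :
    ∀ (l : List (Int × Int)), l.Pairwise (fun p q => q.2 ≤ p.2) →
      l.take (l.countP g) = l.filter g := by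
  intro l
  induction l with
  | nil => simp
  | cons p t ih =>
    intro hd
    rw [List.pairwise_cons] at hd
    obtain ⟨hp, ht⟩ := hd
    by_cases hgp : g p = true
    · rw [List.countP_cons_of_pos hgp, List.filter_cons_of_pos hgp, List.take_succ_cons,
        ih ht]
    · have hz : t.countP g = 0 := by
        rw [List.countP_eq_zero]
        intro q hq hgq
        exact hgp (hmono p q (hp q hq) hgq)
      have hfz : t.filter g = [] := by
        rw [List.filter_eq_nil_iff]
        intro q hq hgq
        exact hgp (hmono p q (hp q hq) hgq)
      rw [List.countP_cons_of_neg hgp, hz, List.filter_cons_of_neg hgp, hfz]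
      simp

-- the two predicates we use
theorem pv_mono_le (L : Int) : ∀ p q : Int × Int, q.2 ≤ p.2 →
    decide (L ≤ q.2) = true → decide (L ≤ p.2) = true := by intro p q h hq; simp at *; omega
theorem pv_mono_lt (L : Int) : ∀ p q : Int × Int, q.2 ≤ p.2 →
    decide (L < q.2) = true → decide (L < p.2) = true := by intro p q h hq; simp at *; omega

-- ---------- pvExtend computes the count of elements ≥ level ----------
theorem pv_extend_eq (l : List (Int × Int)) (hdesc : l.Pairwise (fun p q => q.2 ≤ p.2))
    (L : Int) (m : Nat)
    (h1 : l.countP (fun p => decide (L < p.2)) ≤ m)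
    (h2 : m ≤ l.countP (fun p => decide (L ≤ p.2))) :
    pvExtend l L m = l.countP (fun p => decide (L ≤ p.2)) := by
  induction m using pvExtend.induct l L with
  | case1 m hm heq ih =>
    rw [pvExtend, dif_pos hm, if_pos heq]
    refine ih ?_ ?_
    · omega
    · have : decide (L ≤ l[m].2) = true := by simp at heq ⊢; omega
      have := (pv_desc_getElem_iff _ (pv_mono_le L) l hdesc m hm).mp this
      omega
  | case2 m hm hne =>
    rw [pvExtend, dif_pos hm, if_neg hne]
    rcases Nat.lt_or_ge m (l.countP (fun p => decide (L ≤ p.2))) with h | h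
    · exfalso
      have hle := (pv_desc_getElem_iff _ (pv_mono_le L) l hdesc m hm).mpr h
      have hnlt : ¬ (decide (L < l[m].2) = true) := by
        intro hc
        have := (pv_desc_getElem_iff _ (pv_mono_lt L) l hdesc m hm).mp hc
        omega
      simp only [decide_eq_true_eq, not_lt] at hle hnlt
      have : l[m].2 = L := le_antisymm hnlt hle
      simp [this] at hne
    · omega
  | case3 m hm =>
    rw [pvExtend, dif_neg hm]
    have := l.countP_le_length (p := fun p => decide (L ≤ p.2))
    omega


-- ---------- abbreviations for the proof ----------
def pvSub (nums : List Int) (L : Int) : List Int := nums.map (fun v => v - min v L)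
def pvCur (nums : List Int) (L : Int) : List Int := nums.map (fun v => min v L)
def pvCnt (nums : List Int) (L : Int) : Nat := (pvPairs nums).countP (fun p => decide (L ≤ p.2))
def pvCntGT (nums : List Int) (L : Int) : Nat := (pvPairs nums).countP (fun p => decide (L < p.2))
def pvNxt (nums : List Int) (L : Int) : Int :=
  if h : pvCnt nums L < (pvPairs nums).length then ((pvPairs nums)[pvCnt nums L]'h).2 else 0

theorem pv_cnt_le_length (nums : List Int) (L : Int) : pvCnt nums L ≤ (pvPairs nums).length :=
  List.countP_le_length

-- the comprehension [nums[i] - s[i] for i in range(len(nums))] for s = map g nums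
theorem pv_current_eq (nums : List Int) (g : Int → Int) :
    (PySem.List.pyRange 0 (PySem.List.len nums)).map
        (fun i => PySem.List.pyGetD nums i 0 - PySem.List.pyGetD (nums.map g) i 0)
      = nums.map (fun v => v - g v) := by
  rw [PySem.List.len_eq, PySem.List.pyRange_zero_nat]
  rw [List.map_map]
  apply List.ext_getElem
  · simp
  · intro j h1 h2
    simp only [List.getElem_map, List.getElem_range, Function.comp_apply]
    have hj : j < nums.length := by simpa using h2
    rw [PySem.List.pyGetD_natCast, PySem.List.pyGetD_natCast]
    rw [List.getD_eq_getElem _ _ hj, List.getD_eq_getElem _ _ (by simpa using hj)]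
    simp

-- ---------- unique_vals = sorted(set(current), reverse=True) facts ----------
theorem pv_U_facts (nums : List Int) (L : Int) :
    (PySem.List.sorted (PySem.Set.ofList (pvCur nums L)) (fun v => v) true).Pairwise (· > ·)
    ∧ (∀ x : Int, x ∈ PySem.List.sorted (PySem.Set.ofList (pvCur nums L)) (fun v => v) true
        ↔ x ∈ pvCur nums L) := by
  set U := PySem.List.sorted (PySem.Set.ofList (pvCur nums L)) (fun v => v) true with hU
  have hperm : U.Perm (PySem.Set.ofList (pvCur nums L)) := PySem.List.sorted_perm _ _ _
  have hnd : U.Nodup := hperm.nodup_iff.mpr (PySem.Set.nodup_ofList _)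
  have hpw : U.Pairwise (fun a b => b ≤ a) := PySem.List.sorted_pairwise_rev _ _
  constructor
  · exact (hpw.and hnd).imp (by rintro a b ⟨h1, h2⟩; exact lt_of_le_of_ne h1 (Ne.symm h2))
  · intro x
    rw [hperm.mem_iff, PySem.Set.mem_ofList]

theorem pv_U_head (nums : List Int) (L : Int) (hex : ∃ v ∈ nums, L ≤ v) :
    ∃ t, PySem.List.sorted (PySem.Set.ofList (pvCur nums L)) (fun v => v) true = L :: t := by
  obtain ⟨hpw, hmem⟩ := pv_U_facts nums L
  set U := PySem.List.sorted (PySem.Set.ofList (pvCur nums L)) (fun v => v) true with hU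
  obtain ⟨v, hv, hvL⟩ := hex
  have hLcur : L ∈ pvCur nums L := by
    rw [pvCur, List.mem_map]; exact ⟨v, hv, by omega⟩
  have hLU : L ∈ U := (hmem L).mpr hLcur
  rcases hUe : U with _ | ⟨u0, t⟩
  · rw [hUe] at hLU; simp at hLU
  refine ⟨t, ?_⟩
  have hu0cur : u0 ∈ pvCur nums L := (hmem u0).mp (by rw [hUe]; simp)
  have hu0le : u0 ≤ L := by
    rw [pvCur, List.mem_map] at hu0cur
    obtain ⟨w, _, rfl⟩ := hu0cur
    omega
  rw [hUe] at hLU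
  rw [List.mem_cons] at hLU
  rcases hLU with h | h
  · rw [h]
  · exfalso
    rw [hUe] at hpw
    have := List.rel_of_pairwise_cons hpw h
    omega

theorem pv_U_next (nums : List Int) (L : Int) (hL : 0 ≤ L) (hex : ∃ v ∈ nums, L ≤ v) :
    (if 1 < (PySem.List.sorted (PySem.Set.ofList (pvCur nums L)) (fun v => v) true).length
      then PySem.List.pyGetD (PySem.List.sorted (PySem.Set.ofList (pvCur nums L)) (fun v => v) true) 1 0
      else 0) = pvNxt nums L := by
  obtain ⟨hpw, hmem⟩ := pv_U_facts nums L
  obtain ⟨t, hUe⟩ := pv_U_head nums L hex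
  have hcq : pvCnt nums L = (pvPairs nums).countP (fun p => decide (L ≤ p.2)) := rfl
  set U := PySem.List.sorted (PySem.Set.ofList (pvCur nums L)) (fun v => v) true with hU
  by_cases hc : pvCnt nums L < (pvPairs nums).length
  · -- some value of nums is < L; next is pairs[cnt].2
    have hw := (pv_desc_getElem_iff _ (pv_mono_le L) (pvPairs nums) (pv_pairs_desc nums)
      (pvCnt nums L) hc)
    have hwlt : ((pvPairs nums)[pvCnt nums L]'hc).2 < L := by
      by_contra hcon
      have := hw.mp (by simp only [decide_eq_true_eq]; omega)
      omega
    set w := ((pvPairs nums)[pvCnt nums L]'hc).2 with hwdef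
    have hwnums : w ∈ nums := by
      have : (pvPairs nums)[pvCnt nums L]'hc ∈ pvPairs nums := List.getElem_mem _
      have h2 : w ∈ (pvPairs nums).map Prod.snd := List.mem_map.mpr ⟨_, this, rfl⟩
      exact (pv_pairs_snd_perm nums).mem_iff.mp h2
    have hwcur : w ∈ pvCur nums L := by
      rw [pvCur, List.mem_map]; exact ⟨w, hwnums, by omega⟩
    -- every value of current below L is ≤ w
    have hmax : ∀ c ∈ pvCur nums L, c < L → c ≤ w := by
      intro c hccur hclt
      rw [pvCur, List.mem_map] at hccur
      obtain ⟨v, hv, rfl⟩ := hccur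
      have hvlt : v < L := by omega
      have hvc : min v L = v := by omega
      rw [hvc]
      -- v is some pairs[j].2 with j ≥ cnt
      have : v ∈ (pvPairs nums).map Prod.snd := (pv_pairs_snd_perm nums).mem_iff.mpr hv
      rw [List.mem_map] at this
      obtain ⟨p, hp, rfl⟩ := this
      obtain ⟨j, hj, rfl⟩ := List.getElem_of_mem hp
      rcases Nat.lt_or_ge j (pvCnt nums L) with hjc | hjc
      · exfalso
        have h3 := (pv_desc_getElem_iff _ (pv_mono_le L) (pvPairs nums) (pv_pairs_desc nums) j hj).mpr (by omega)
        simp only [decide_eq_true_eq] at h3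
        omega
      · rcases Nat.eq_or_lt_of_le hjc with heq | hjc'
        · subst heq
          exact le_of_eq hwdef.symm
        · have hmono := List.pairwise_iff_getElem.mp (pv_pairs_desc nums)
          have := hmono (pvCnt nums L) j hc hj hjc'
          omega
    -- U has ≥ 2 elements and U[1] = w
    have hwU : w ∈ U := (hmem w).mpr hwcur
    have hwne : w ≠ L := by omega
    rw [hUe] at hwU
    rw [List.mem_cons] at hwU
    rcases hwU with h | hwt
    · exact absurd h hwne
    rcases hte : t with _ | ⟨u1, t'⟩
    · rw [hte] at hwt; simp at hwt
    have hlen : 1 < U.length := by rw [hUe, hte]; simp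
    rw [if_pos hlen]
    have hu1 : PySem.List.pyGetD U 1 0 = u1 := by
      rw [hUe, hte]
      have : ((1:Nat) : Int) = (1 : Int) := rfl
      rw [← this, PySem.List.pyGetD_natCast]
      simp
    rw [hu1, pvNxt, dif_pos hc]
    -- u1 = w
    have hu1U : u1 ∈ U := by rw [hUe, hte]; simp
    have hu1cur : u1 ∈ pvCur nums L := (hmem u1).mp hu1U
    have hu1lt : u1 < L := by
      rw [hUe, hte] at hpw
      exact List.rel_of_pairwise_cons hpw (by simp)
    have h1 : u1 ≤ w := hmax u1 hu1cur hu1lt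
    rw [hte] at hwt
    rw [List.mem_cons] at hwt
    rcases hwt with h | h
    · omega
    · exfalso
      rw [hUe, hte] at hpw
      have := List.rel_of_pairwise_cons (hpw.tail) h
      omega
  · -- all values ≥ L : U = [L], next = 0
    have hall : ∀ v ∈ nums, L ≤ v := by
      have hcnt : (pvPairs nums).countP (fun p => decide (L ≤ p.2)) = (pvPairs nums).length := by
        have := pv_cnt_le_length nums L
        rw [pvCnt] at *
        omega
      rw [List.countP_eq_length] at hcnt
      intro v hv
      have : v ∈ (pvPairs nums).map Prod.snd := (pv_pairs_snd_perm nums).mem_iff.mpr hv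
      rw [List.mem_map] at this
      obtain ⟨p, hp, rfl⟩ := this
      simpa using hcnt p hp
    have ht : t = [] := by
      rcases hte : t with _ | ⟨u1, t'⟩
      · rfl
      exfalso
      have hu1cur : u1 ∈ pvCur nums L := (hmem u1).mp (by rw [hUe, hte]; simp)
      have hu1lt : u1 < L := by
        rw [hUe, hte] at hpw
        exact List.rel_of_pairwise_cons hpw (by simp)
      rw [pvCur, List.mem_map] at hu1cur
      obtain ⟨v, hv, rfl⟩ := hu1cur
      have := hall v hv
      omega
    rw [hUe, ht]
    simp [pvNxt, dif_neg hc]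

-- ---------- the indices list of an A-iteration ----------
theorem pv_beq_min (a L : Int) : (min a L == L) = decide (L ≤ a) := by
  by_cases h : L ≤ a
  · simp only [h, decide_true]
    have : min a L = L := by omega
    simp [this]
  · simp only [h, decide_false]
    have : min a L = a := by omega
    rw [this]
    simp only [beq_eq_false_iff_ne, ne_eq]
    omega

theorem pv_indices_eq (nums : List Int) (L : Int) :
    PySem.List.sorted2
      ((PySem.List.pyRange 0 (PySem.List.len (pvCur nums L))).filter
        (fun i => PySem.List.pyGetD (pvCur nums L) i 0 == L))
      (fun i => -(PySem.List.pyGetD nums i 0)) (fun i => i)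
    = ((pvPairs nums).take (pvCnt nums L)).map Prod.fst := by
  have hlen : PySem.List.len (pvCur nums L) = PySem.List.len nums := by
    simp [PySem.List.len_eq, pvCur]
  have hcond : ((PySem.List.pyRange 0 (PySem.List.len (pvCur nums L))).filter
        (fun i => PySem.List.pyGetD (pvCur nums L) i 0 == L))
      = ((PySem.List.pyRange 0 (PySem.List.len nums)).filter
        (fun i => decide (L ≤ PySem.List.pyGetD nums i 0))) := by
    rw [hlen]
    apply List.filter_congr
    intro i hi
    rw [PySem.List.mem_pyRange_one] at hi
    simp only [PySem.List.len_eq] at hi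
    have hi2 : i < (nums.length : Int) := hi.2
    have hgd : PySem.List.pyGetD (pvCur nums L) i 0 = min (PySem.List.pyGetD nums i 0) L := by
      rw [PySem.List.pyGetD_eq_getElem (pvCur nums L) 0 (by omega) (by simp [pvCur]; omega),
        PySem.List.pyGetD_eq_getElem nums 0 (by omega) (by omega)]
      simp [pvCur]
    rw [hgd, pv_beq_min]
  rw [hcond]
  have htake : (pvPairs nums).take (pvCnt nums L)
      = (pvPairs nums).filter (fun p => decide (L ≤ p.2)) :=
    pv_desc_take_countP _ (pv_mono_le L) _ (pv_pairs_desc nums)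
  refine pv_sorted2_eq _ _ _ _ ?_ ?_
  · -- permutation
    rw [htake]
    have h1 : ((pvPairs nums).filter (fun p => decide (L ≤ p.2))).Perm
        ((PySem.List.enumerate nums).filter (fun p => decide (L ≤ p.2))) :=
      (pv_pairs_perm nums).filter _
    refine (h1.map Prod.fst).trans ?_
    rw [pv_enumerate_explicit, List.filter_map, List.map_map]
    have : (Prod.fst ∘ fun j => (j, PySem.List.pyGetD nums j 0)) = id := rfl
    rw [this, List.map_id]
    exact List.Perm.refl _
  · -- strictly increasing keys
    have hsub : ((pvPairs nums).take (pvCnt nums L)).Pairwise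
        (fun p q => -p.2 < -q.2 ∨ (-p.2 = -q.2 ∧ p.1 < q.1)) :=
      (pv_pairs_pairwise_lex nums).sublist (List.take_sublist _ _)
    have hmem : ∀ p ∈ (pvPairs nums).take (pvCnt nums L), PySem.List.pyGetD nums p.1 0 = p.2 :=
      fun p hp => (pv_mem_pairs nums p ((List.take_sublist _ _).mem hp)).2.2
    rw [List.pairwise_map]
    refine List.Pairwise.imp_of_mem ?_ hsub
    intro p q hp hq h
    rw [hmem p hp, hmem q hq]
    exact h

-- ---------- pvNxt facts ----------
theorem pv_all_ge_of_cnt_eq (nums : List Int) (L : Int)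
    (h : ¬ pvCnt nums L < (pvPairs nums).length) : ∀ v ∈ nums, L ≤ v := by
  have hle := pv_cnt_le_length nums L
  have hcnt : (pvPairs nums).countP (fun p => decide (L ≤ p.2)) = (pvPairs nums).length := by
    rw [pvCnt] at *; omega
  rw [List.countP_eq_length] at hcnt
  intro v hv
  have : v ∈ (pvPairs nums).map Prod.snd := (pv_pairs_snd_perm nums).mem_iff.mpr hv
  rw [List.mem_map] at this
  obtain ⟨p, hp, rfl⟩ := this
  simpa using hcnt p hp

theorem pv_nxt_lt (nums : List Int) (L : Int) (hc : pvCnt nums L < (pvPairs nums).length) :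
    pvNxt nums L < L := by
  rw [pvNxt, dif_pos hc]
  have hcq : pvCnt nums L = (pvPairs nums).countP (fun p => decide (L ≤ p.2)) := rfl
  by_contra hcon
  have := (pv_desc_getElem_iff _ (pv_mono_le L) (pvPairs nums) (pv_pairs_desc nums)
    (pvCnt nums L) hc).mp (by simp only [decide_eq_true_eq]; omega)
  omega

theorem pv_nxt_mem_or (nums : List Int) (L : Int) :
    pvNxt nums L = 0 ∨ pvNxt nums L ∈ nums := by
  rw [pvNxt]
  by_cases hc : pvCnt nums L < (pvPairs nums).length
  · rw [dif_pos hc]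
    right
    have : (pvPairs nums)[pvCnt nums L]'hc ∈ pvPairs nums := List.getElem_mem _
    exact (pv_pairs_snd_perm nums).mem_iff.mp (List.mem_map.mpr ⟨_, this, rfl⟩)
  · rw [dif_neg hc]; left; rfl

theorem pv_nxt_max (nums : List Int) (L : Int) :
    ∀ v ∈ nums, v < L → v ≤ pvNxt nums L := by
  intro v hv hvlt
  have hcq : pvCnt nums L = (pvPairs nums).countP (fun p => decide (L ≤ p.2)) := rfl
  by_cases hc : pvCnt nums L < (pvPairs nums).length
  · rw [pvNxt, dif_pos hc]
    have : v ∈ (pvPairs nums).map Prod.snd := (pv_pairs_snd_perm nums).mem_iff.mpr hv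
    rw [List.mem_map] at this
    obtain ⟨p, hp, rfl⟩ := this
    obtain ⟨j, hj, rfl⟩ := List.getElem_of_mem hp
    rcases Nat.lt_or_ge j (pvCnt nums L) with hjc | hjc
    · exfalso
      have h3 := (pv_desc_getElem_iff _ (pv_mono_le L) (pvPairs nums) (pv_pairs_desc nums) j hj).mpr (by omega)
      simp only [decide_eq_true_eq] at h3
      omega
    · rcases Nat.eq_or_lt_of_le hjc with heq | hjc'
      · subst heq; exact le_of_eq rfl
      · have hmono := List.pairwise_iff_getElem.mp (pv_pairs_desc nums)
        exact hmono (pvCnt nums L) j hc hj hjc'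
  · exact absurd (pv_all_ge_of_cnt_eq nums L hc v hv) (by omega)

-- ---------- membership of an index in the frontier prefix ----------
theorem pv_pair_at (nums : List Int) (j : Nat) (hj : j < nums.length) :
    ((j : Int), nums[j]) ∈ pvPairs nums := by
  rw [(pv_pairs_perm nums).mem_iff, pv_enumerate_explicit, List.mem_map]
  refine ⟨(j : Int), ?_, ?_⟩
  · rw [PySem.List.mem_pyRange_one, PySem.List.len_eq]; omega
  · rw [PySem.List.pyGetD_natCast, List.getD_eq_getElem _ _ hj]

theorem pv_fst_take_mem_le (nums : List Int) (L : Int) (m : Nat) (hm : m ≤ pvCnt nums L)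
    (j : Nat) (hj : j < nums.length)
    (hmem : ((j : Int)) ∈ ((pvPairs nums).take m).map Prod.fst) : L ≤ nums[j] := by
  rw [List.mem_map] at hmem
  obtain ⟨p, hp, hfst⟩ := hmem
  rw [List.mem_take_iff_getElem] at hp
  obtain ⟨jdx, hjdx, rfl⟩ := hp
  have hjl : jdx < (pvPairs nums).length := by omega
  have hcq : pvCnt nums L = (pvPairs nums).countP (fun p => decide (L ≤ p.2)) := rfl
  have hle := (pv_desc_getElem_iff _ (pv_mono_le L) (pvPairs nums) (pv_pairs_desc nums) jdx
    hjl).mpr (by omega)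
  simp only [decide_eq_true_eq] at hle
  have hval := (pv_mem_pairs nums ((pvPairs nums)[jdx]'hjl) (List.getElem_mem hjl)).2.2
  rw [hfst, PySem.List.pyGetD_natCast, List.getD_eq_getElem _ _ hj] at hval
  omega

theorem pv_fst_take_mem_of_gt (nums : List Int) (L : Int) (m : Nat) (hm : pvCntGT nums L ≤ m)
    (j : Nat) (hj : j < nums.length) (hgt : L < nums[j]) :
    ((j : Int)) ∈ ((pvPairs nums).take m).map Prod.fst := by
  have hp := pv_pair_at nums j hj
  obtain ⟨jdx, hjdx, heq⟩ := List.getElem_of_mem hp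
  have hlt : jdx < pvCntGT nums L := by
    have := (pv_desc_getElem_iff _ (pv_mono_lt L) (pvPairs nums) (pv_pairs_desc nums) jdx hjdx).mp
      (by rw [heq]; simp only [decide_eq_true_eq]; exact hgt)
    have hcq : pvCntGT nums L = (pvPairs nums).countP (fun p => decide (L < p.2)) := rfl
    omega
  rw [List.mem_map]
  refine ⟨((j : Int), nums[j]), ?_, rfl⟩
  rw [List.mem_take_iff_getElem]
  exact ⟨jdx, by omega, heq⟩

-- ---------- list-update helpers ----------
theorem pv_sum_set (z : List Int) (n : Nat) (a : Int) (hn : n < z.length) :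
    (z.set n a).sum = z.sum - z[n] + a := by
  induction z generalizing n with
  | nil => simp at hn
  | cons x t ih =>
    cases n with
    | zero => simp [List.set]; ring
    | succ n =>
      simp only [List.set, List.sum_cons, List.getElem_cons_succ]
      rw [ih n (by simpa using hn)]
      ring

theorem pv_subupd_eq (acc : List Int) (idx c : Int) (h0 : 0 ≤ idx) (h1 : idx < (acc.length : Int)) :
    pvSubUpd acc idx c = acc.set idx.toNat (acc[idx.toNat]'(by omega) + c) := by
  rw [pvSubUpd, PySem.List.pyGetD_eq_getElem acc 0 h0 h1, PySem.List.pySetD_of_nonneg _ _ h0]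

theorem pv_getD_set (z : List Int) (n : Nat) (a : Int) (j : Nat) (hn : n < z.length) :
    (z.set n a).getD j 0 = if j = n then a else z.getD j 0 := by
  by_cases hj : j < z.length
  · rw [List.getD_eq_getElem _ _ (by simpa using hj), List.getElem_set]
    by_cases hjn : j = n
    · simp [hjn]
    · rw [if_neg (by omega), if_neg hjn, List.getD_eq_getElem _ _ hj]
  · rw [if_neg (by omega)]
    rw [List.getD_eq_default _ _ (by simpa using (by omega : ¬ j < z.length)),
      List.getD_eq_default _ _ (by omega)]

-- A's 'for idx in indices: subtrahends[idx] += reduction'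
theorem pv_foldl_subupd (c : Int) :
    ∀ (idxs : List Int) (s : List Int), idxs.Nodup →
      (∀ i ∈ idxs, 0 ≤ i ∧ i < (s.length : Int)) →
      (idxs.foldl (fun acc idx => pvSubUpd acc idx c) s).length = s.length ∧
      (∀ j : Nat,
        (idxs.foldl (fun acc idx => pvSubUpd acc idx c) s).getD j 0
          = if ((j : Int) ∈ idxs) then s.getD j 0 + c else s.getD j 0) := by
  intro idxs
  induction idxs with
  | nil => intro s _ _; exact ⟨rfl, by intro j; simp⟩
  | cons i t ih =>
    intro s hnd hr
    have h0 : 0 ≤ i := (hr i (by simp)).1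
    have h1 : i < (s.length : Int) := (hr i (by simp)).2
    have hset : (s.set i.toNat (s[i.toNat]'(by omega) + c)).length = s.length := by simp
    have hr' : ∀ x ∈ t, 0 ≤ x ∧ x < ((s.set i.toNat (s[i.toNat]'(by omega) + c)).length : Int) := by
      intro x hx; rw [hset]; exact hr x (by simp [hx])
    obtain ⟨ihlen, ihget⟩ := ih _ (List.Nodup.of_cons hnd) hr'
    simp only [List.foldl_cons, pv_subupd_eq s i c h0 h1]
    refine ⟨by rw [ihlen, hset], ?_⟩
    intro j
    rw [ihget j, pv_getD_set _ _ _ _ (by omega)]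
    have hgd : s.getD i.toNat 0 = s[i.toNat]'(by omega) := List.getD_eq_getElem _ _ (by omega)
    by_cases hji : j = i.toNat
    · have hj2 : (j : Int) = i := by omega
      have hjt : ¬ (j : Int) ∈ t := fun hc => (List.nodup_cons.mp hnd).1 (hj2 ▸ hc)
      rw [if_neg hjt, if_pos hji,
        if_pos (show (j : Int) ∈ i :: t by rw [hj2]; exact List.mem_cons_self ..), hji, hgd]
    · rw [if_neg hji]
      by_cases hjt : (j : Int) ∈ t
      · rw [if_pos hjt, if_pos (List.mem_cons_of_mem _ hjt)]
      · rw [if_neg hjt,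
          if_neg (show ¬ (j : Int) ∈ i :: t by rw [List.mem_cons]; push_neg; exact ⟨by omega, hjt⟩)]

theorem pv_fst_take_mem_of_ge (nums : List Int) (L : Int) (m : Nat) (hm : pvCnt nums L ≤ m)
    (j : Nat) (hj : j < nums.length) (hge : L ≤ nums[j]) :
    ((j : Int)) ∈ ((pvPairs nums).take m).map Prod.fst := by
  have hp := pv_pair_at nums j hj
  obtain ⟨jdx, hjdx, heq⟩ := List.getElem_of_mem hp
  have hlt : jdx < pvCnt nums L := by
    have := (pv_desc_getElem_iff _ (pv_mono_le L) (pvPairs nums) (pv_pairs_desc nums) jdx hjdx).mp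
      (by rw [heq]; simp only [decide_eq_true_eq]; exact hge)
    have hcq : pvCnt nums L = (pvPairs nums).countP (fun p => decide (L ≤ p.2)) := rfl
    omega
  rw [List.mem_map]
  refine ⟨((j : Int), nums[j]), ?_, rfl⟩
  rw [List.mem_take_iff_getElem]
  exact ⟨jdx, by omega, heq⟩

theorem pv_sub_length (nums : List Int) (L : Int) : (pvSub nums L).length = nums.length := by
  simp [pvSub]

theorem pv_sub_getD (nums : List Int) (L : Int) (j : Nat) (hj : j < nums.length) :
    (pvSub nums L).getD j 0 = nums[j] - min nums[j] L := by
  rw [List.getD_eq_getElem _ _ (by simpa [pvSub] using hj)]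
  simp [pvSub]

theorem pv_take_fst_nodup (nums : List Int) (m : Nat) :
    (((pvPairs nums).take m).map Prod.fst).Nodup := by
  rw [List.map_take]
  exact (pv_pairs_fst_nodup nums).sublist (List.take_sublist _ _)

theorem pv_update_if (nums : List Int) (L N : Int) (hNlt : N < L)
    (hNmax : ∀ v ∈ nums, v < L → v ≤ N) :
    ((((pvPairs nums).take (pvCnt nums L)).map Prod.fst).foldl
      (fun acc idx => pvSubUpd acc idx (L - N)) (pvSub nums L)) = pvSub nums N := by
  have hnd : (((pvPairs nums).take (pvCnt nums L)).map Prod.fst).Nodup := pv_take_fst_nodup nums _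
  have hr : ∀ i ∈ ((pvPairs nums).take (pvCnt nums L)).map Prod.fst,
      0 ≤ i ∧ i < ((pvSub nums L).length : Int) := by
    intro i hi
    rw [List.mem_map] at hi
    obtain ⟨p, hp, rfl⟩ := hi
    have := pv_mem_pairs nums p ((List.take_sublist _ _).mem hp)
    rw [pv_sub_length]
    exact ⟨this.1, this.2.1⟩
  obtain ⟨hlen, hget⟩ := pv_foldl_subupd (L - N) _ (pvSub nums L) hnd hr
  apply List.ext_getElem
  · rw [hlen, pv_sub_length, pv_sub_length]
  · intro j h1 h2
    have hjn : j < nums.length := by rw [pv_sub_length] at h2; exact h2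
    rw [← List.getD_eq_getElem _ 0 h1, ← List.getD_eq_getElem _ 0 h2, hget j,
      pv_sub_getD _ _ _ hjn, pv_sub_getD _ _ _ hjn]
    by_cases hmem : ((j : Int)) ∈ ((pvPairs nums).take (pvCnt nums L)).map Prod.fst
    · have hge := pv_fst_take_mem_le nums L _ (le_refl _) j hjn hmem
      rw [if_pos hmem]
      have h3 : min nums[j] L = L := by omega
      have h4 : min nums[j] N = N := by omega
      omega
    · have hlt : nums[j] < L := by
        by_contra hcon
        exact hmem (pv_fst_take_mem_of_ge nums L _ (le_refl _) j hjn (by omega))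
      have := hNmax nums[j] (List.getElem_mem _) hlt
      rw [if_neg hmem]
      have h3 : min nums[j] L = nums[j] := by omega
      have h4 : min nums[j] N = nums[j] := by omega
      omega

-- ---------- B's scatter loop: generic facts ----------
theorem pv_bld_len (Lf r : Int) :
    ∀ (tk : List (Int × Int)) (off : Int) (z : List Int),
      ((PySem.List.enumerate tk off).foldl
        (fun acc p => PySem.List.pySetD acc p.2.1 (p.2.2 - Lf + (if p.1 < r then 1 else 0))) z).length
      = z.length := by
  intro tk
  induction tk with
  | nil => intro off z; simp [PySem.List.enumerate]
  | cons p t ih =>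
    intro off z
    rw [PySem.List.enumerate_cons, List.foldl_cons, ih]
    exact PySem.List.length_pySetD _ _ _

theorem pv_bld_getD (Lf r : Int) :
    ∀ (tk : List (Int × Int)) (off : Int) (z : List Int),
      (tk.map Prod.fst).Nodup → (∀ p ∈ tk, 0 ≤ p.1 ∧ p.1 < (z.length : Int)) →
      (∀ j : Nat, ((j : Int)) ∉ tk.map Prod.fst →
        ((PySem.List.enumerate tk off).foldl
          (fun acc p => PySem.List.pySetD acc p.2.1 (p.2.2 - Lf + (if p.1 < r then 1 else 0))) z).getD j 0
        = z.getD j 0)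
      ∧ (∀ (jdx : Nat) (hjdx : jdx < tk.length),
        ((PySem.List.enumerate tk off).foldl
          (fun acc p => PySem.List.pySetD acc p.2.1 (p.2.2 - Lf + (if p.1 < r then 1 else 0))) z).getD (tk[jdx].1).toNat 0
        = tk[jdx].2 - Lf + (if off + jdx < r then 1 else 0)) := by
  intro tk
  induction tk with
  | nil =>
    intro off z _ _
    constructor
    · intro j _; simp [PySem.List.enumerate]
    · intro jdx hjdx; simp at hjdx
  | cons p t ih =>
    intro off z hnd hr
    have h0 : 0 ≤ p.1 := (hr p (by simp)).1
    have h1 : p.1 < (z.length : Int) := (hr p (by simp)).2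
    have hz' : PySem.List.pySetD z p.1 (p.2 - Lf + (if off < r then 1 else 0))
        = z.set p.1.toNat (p.2 - Lf + (if off < r then 1 else 0)) :=
      PySem.List.pySetD_of_nonneg _ _ h0
    have hlen' : (z.set p.1.toNat (p.2 - Lf + (if off < r then 1 else 0))).length = z.length := by simp
    have hnd' : (t.map Prod.fst).Nodup := (List.nodup_cons.mp (by simpa using hnd)).2
    have hpnot : (p.1) ∉ t.map Prod.fst := (List.nodup_cons.mp (by simpa using hnd)).1
    have hr' : ∀ q ∈ t, 0 ≤ q.1 ∧ q.1 < ((z.set p.1.toNat (p.2 - Lf + (if off < r then 1 else 0))).length : Int) := by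
      intro q hq; rw [hlen']; exact hr q (by simp [hq])
    obtain ⟨ihu, iht⟩ := ih (off + 1) _ hnd' hr'
    rw [PySem.List.enumerate_cons]
    constructor
    · intro j hj
      simp only [List.map_cons, List.mem_cons] at hj
      push_neg at hj
      rw [List.foldl_cons, hz', ihu j (by exact fun hc => hj.2 hc),
        pv_getD_set _ _ _ _ (by omega)]
      rw [if_neg (by omega)]
    · intro jdx hjdx
      cases jdx with
      | zero =>
        simp only [List.getElem_cons_zero]
        rw [List.foldl_cons, hz', ihu (p.1.toNat) (by
            intro hc
            have : ((p.1.toNat : Nat) : Int) = p.1 := by omega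
            rw [this] at hc
            exact hpnot hc),
          pv_getD_set _ _ _ _ (by omega), if_pos rfl]
        norm_num
      | succ jdx =>
        simp only [List.getElem_cons_succ]
        rw [List.foldl_cons, hz', iht jdx (by simpa using hjdx)]
        congr 1
        have : off + 1 + (jdx : Int) = off + ((jdx : Nat) + 1 : Nat) := by push_cast; ring
        rw [this]

theorem pv_bld_sum (Lf r : Int) :
    ∀ (tk : List (Int × Int)) (off : Int) (z : List Int),
      (tk.map Prod.fst).Nodup → (∀ p ∈ tk, 0 ≤ p.1 ∧ p.1 < (z.length : Int)) →
      (∀ p ∈ tk, z.getD p.1.toNat 0 = 0) →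
      ((PySem.List.enumerate tk off).foldl
        (fun acc p => PySem.List.pySetD acc p.2.1 (p.2.2 - Lf + (if p.1 < r then 1 else 0))) z).sum
      = z.sum + (tk.map (fun p => p.2 - Lf)).sum + min (max (r - off) 0) (tk.length : Int) := by
  intro tk
  induction tk with
  | nil => intro off z _ _ _; simp [PySem.List.enumerate]
  | cons p t ih =>
    intro off z hnd hr hz
    have h0 : 0 ≤ p.1 := (hr p (by simp)).1
    have h1 : p.1 < (z.length : Int) := (hr p (by simp)).2
    have hz' : PySem.List.pySetD z p.1 (p.2 - Lf + (if off < r then 1 else 0))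
        = z.set p.1.toNat (p.2 - Lf + (if off < r then 1 else 0)) :=
      PySem.List.pySetD_of_nonneg _ _ h0
    have hlen' : (z.set p.1.toNat (p.2 - Lf + (if off < r then 1 else 0))).length = z.length := by simp
    have hnd' : (t.map Prod.fst).Nodup := (List.nodup_cons.mp (by simpa using hnd)).2
    have hpnot : (p.1) ∉ t.map Prod.fst := (List.nodup_cons.mp (by simpa using hnd)).1
    have hr' : ∀ q ∈ t, 0 ≤ q.1 ∧ q.1 < ((z.set p.1.toNat (p.2 - Lf + (if off < r then 1 else 0))).length : Int) := by
      intro q hq; rw [hlen']; exact hr q (by simp [hq])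
    have hz2 : ∀ q ∈ t, (z.set p.1.toNat (p.2 - Lf + (if off < r then 1 else 0))).getD q.1.toNat 0 = 0 := by
      intro q hq
      rw [pv_getD_set _ _ _ _ (by omega), if_neg (by
        intro hc
        have hq0 : 0 ≤ q.1 := (hr q (by simp [hq])).1
        have : q.1 = p.1 := by omega
        exact hpnot (this ▸ (List.mem_map.mpr ⟨q, hq, rfl⟩)))]
      exact hz q (by simp [hq])
    rw [PySem.List.enumerate_cons, List.foldl_cons, hz', ih (off + 1) _ hnd' hr' hz2]
    rw [pv_sum_set _ _ _ (by omega)]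
    have hgz : z[p.1.toNat]'(by omega) = 0 := by
      rw [← List.getD_eq_getElem _ 0 (by omega)]
      exact hz p (by simp)
    rw [hgz]
    simp only [List.map_cons, List.sum_cons, List.length_cons]
    have hc : ((t.length + 1 : Nat) : Int) = (t.length : Int) + 1 := by push_cast; ring
    rw [hc]
    have hlt : (0 : Int) ≤ (t.length : Int) := by positivity
    by_cases he : off < r <;> simp only [he, if_true, if_false] <;> omega

theorem pv_bld_bnd (Lf r : Int) (Bnd : Nat → Int) :
    ∀ (tk : List (Int × Int)) (off : Int) (z : List Int),
      (∀ p ∈ tk, 0 ≤ p.1 ∧ p.1 < (z.length : Int)) →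
      (∀ j : Nat, j < z.length → z.getD j 0 ≤ Bnd j) →
      (∀ p ∈ tk, ∀ pos : Int, p.2 - Lf + (if pos < r then 1 else 0) ≤ Bnd p.1.toNat) →
      ∀ j : Nat, j < z.length →
        ((PySem.List.enumerate tk off).foldl
          (fun acc p => PySem.List.pySetD acc p.2.1 (p.2.2 - Lf + (if p.1 < r then 1 else 0))) z).getD j 0 ≤ Bnd j := by
  intro tk
  induction tk with
  | nil => intro off z _ hzb _ j hj; simpa [PySem.List.enumerate] using hzb j hj
  | cons p t ih =>
    intro off z hr hzb hw j hj
    have h0 : 0 ≤ p.1 := (hr p (by simp)).1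
    have h1 : p.1 < (z.length : Int) := (hr p (by simp)).2
    have hz' : PySem.List.pySetD z p.1 (p.2 - Lf + (if off < r then 1 else 0))
        = z.set p.1.toNat (p.2 - Lf + (if off < r then 1 else 0)) :=
      PySem.List.pySetD_of_nonneg _ _ h0
    have hlen' : (z.set p.1.toNat (p.2 - Lf + (if off < r then 1 else 0))).length = z.length := by simp
    rw [PySem.List.enumerate_cons, List.foldl_cons, hz']
    refine ih (off + 1) _ (by intro q hq; rw [hlen']; exact hr q (by simp [hq])) ?_
      (by intro q hq pos; exact hw q (by simp [hq]) pos) j (by rw [hlen']; exact hj)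
    intro j' hj'
    rw [pv_getD_set _ _ _ _ (by omega)]
    by_cases hjp : j' = p.1.toNat
    · rw [if_pos hjp, hjp]
      exact hw p (by simp) off
    · rw [if_neg hjp]
      exact hzb j' (by rw [hlen'] at hj'; exact hj')

-- ---------- A's distribution loop equals B's scatter ----------
theorem pv_scat_ab (L q rm : Int) :
    ∀ (tk : List (Int × Int)) (off : Int) (s z : List Int),
      s.length = z.length →
      (tk.map Prod.fst).Nodup →
      (∀ p ∈ tk, 0 ≤ p.1 ∧ p.1 < (z.length : Int)) →
      (∀ p ∈ tk, s.getD p.1.toNat 0 = p.2 - L) →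
      (∀ j : Nat, j < z.length → ((j : Int)) ∉ tk.map Prod.fst → s.getD j 0 = z.getD j 0) →
      (PySem.List.enumerate (tk.map Prod.fst) off).foldl
          (fun acc p => let acc1 := pvSubUpd acc p.2 q; if p.1 < rm then pvSubUpd acc1 p.2 1 else acc1) s
      = (PySem.List.enumerate tk off).foldl
          (fun acc p => PySem.List.pySetD acc p.2.1 (p.2.2 - (L - q) + (if p.1 < rm then 1 else 0))) z := by
  intro tk
  induction tk with
  | nil =>
    intro off s z hlen _ _ _ hout
    simp only [List.map_nil, PySem.List.enumerate_nil, List.foldl_nil]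
    apply List.ext_getElem hlen
    intro j h1 h2
    rw [← List.getD_eq_getElem _ 0 h1, ← List.getD_eq_getElem _ 0 h2]
    exact hout j h2 (by simp)
  | cons p t ih =>
    intro off s z hlen hnd hr hs hout
    have h0 : 0 ≤ p.1 := (hr p (by simp)).1
    have h1 : p.1 < (z.length : Int) := (hr p (by simp)).2
    have h1s : p.1 < (s.length : Int) := by rw [hlen]; exact h1
    have hnd' : (t.map Prod.fst).Nodup := (List.nodup_cons.mp (by simpa using hnd)).2
    have hpnot : (p.1) ∉ t.map Prod.fst := (List.nodup_cons.mp (by simpa using hnd)).1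
    -- head value
    have hsv : s.getD p.1.toNat 0 = p.2 - L := hs p (by simp)
    have hsv' : s[p.1.toNat]'(by omega) = p.2 - L := by
      rw [← List.getD_eq_getElem _ 0 (by omega)]; exact hsv
    have hstep : (let acc1 := pvSubUpd s p.1 q; if off < rm then pvSubUpd acc1 p.1 1 else acc1)
        = s.set p.1.toNat (p.2 - (L - q) + (if off < rm then 1 else 0)) := by
      show (if off < rm then pvSubUpd (pvSubUpd s p.1 q) p.1 1 else pvSubUpd s p.1 q) = _
      by_cases he : off < rm
      · rw [if_pos he, if_pos he, pv_subupd_eq s p.1 q h0 h1s,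
          pv_subupd_eq _ p.1 1 h0 (by simpa using h1s), List.set_set]
        congr 1
        have hgs : (s.set p.1.toNat (s[p.1.toNat]'(by omega) + q))[p.1.toNat]'(by simp; omega)
            = s[p.1.toNat]'(by omega) + q := List.getElem_set_self (by simp; omega)
        omega
      · rw [if_neg he, if_neg he, pv_subupd_eq s p.1 q h0 h1s]
        congr 1
        omega
    have hzstep : PySem.List.pySetD z p.1 (p.2 - (L - q) + (if off < rm then 1 else 0))
        = z.set p.1.toNat (p.2 - (L - q) + (if off < rm then 1 else 0)) :=
      PySem.List.pySetD_of_nonneg _ _ h0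
    simp only [List.map_cons, PySem.List.enumerate_cons, List.foldl_cons]
    rw [hstep, hzstep]
    refine ih (off + 1) _ _ (by simp [hlen]) hnd' ?_ ?_ ?_
    · intro q' hq'
      have := hr q' (by simp [hq'])
      simpa using this
    · intro q' hq'
      have hq0 : 0 ≤ q'.1 := (hr q' (by simp [hq'])).1
      rw [pv_getD_set _ _ _ _ (by omega), if_neg (by
        intro hc
        have : q'.1 = p.1 := by omega
        exact hpnot (this ▸ (List.mem_map.mpr ⟨q', hq', rfl⟩)))]
      exact hs q' (by simp [hq'])
    · intro j hj hjn
      have hjz : j < z.length := by simpa using hj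
      rw [pv_getD_set _ _ _ _ (by omega), pv_getD_set _ _ _ _ (by omega)]
      by_cases hjp : j = p.1.toNat
      · rw [if_pos hjp, if_pos hjp]
      · rw [if_neg hjp, if_neg hjp]
        exact hout j hjz (by
          intro hc
          simp only [List.map_cons, List.mem_cons] at hc
          rcases hc with hc | hc
          · exact hjp (by omega)
          · exact hjn hc)

-- ---------- build = pvSub in the exact-exit case ----------
theorem pv_build_eq_sub (nums : List Int) (L : Int) (m : Nat)
    (hm1 : pvCntGT nums L ≤ m) (hm2 : m ≤ pvCnt nums L) :
    pvBuild nums m L 0 = pvSub nums L := by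
  rw [pvBuild, PySem.List.slice_to_natCast, PySem.List.pyRepeat_singleton]
  have hz : ((PySem.List.len nums).toNat) = nums.length := by simp [PySem.List.len_eq]
  rw [hz]
  have hzr : (List.replicate nums.length (0 : Int)).length = nums.length := by simp
  have hnd := pv_take_fst_nodup nums m
  have hr : ∀ p ∈ (pvPairs nums).take m, 0 ≤ p.1 ∧ p.1 < ((List.replicate nums.length (0:Int)).length : Int) := by
    intro p hp
    have := pv_mem_pairs nums p ((List.take_sublist _ _).mem hp)
    rw [hzr]
    exact ⟨this.1, this.2.1⟩
  obtain ⟨hu, ht⟩ := pv_bld_getD L 0 ((pvPairs nums).take m) 0 _ hnd hr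
  apply List.ext_getElem
  · rw [pv_bld_len, hzr, pv_sub_length]
  · intro j h1 h2
    have hjn : j < nums.length := by rw [pv_sub_length] at h2; exact h2
    rw [← List.getD_eq_getElem _ 0 h1, ← List.getD_eq_getElem _ 0 h2, pv_sub_getD _ _ _ hjn]
    by_cases hmem : ((j : Int)) ∈ ((pvPairs nums).take m).map Prod.fst
    · have hge := pv_fst_take_mem_le nums L m hm2 j hjn hmem
      rw [List.mem_map] at hmem
      obtain ⟨p, hp, hfst⟩ := hmem
      rw [List.mem_take_iff_getElem] at hp
      obtain ⟨jdx, hjdx, rfl⟩ := hp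
      have hjt : jdx < ((pvPairs nums).take m).length := by
        rw [List.length_take]; omega
      have hval := ht jdx hjt
      have hgt : ((pvPairs nums).take m)[jdx]'hjt = (pvPairs nums)[jdx]'(by omega) := by
        exact List.getElem_take
      have h0p : 0 ≤ ((pvPairs nums)[jdx]'(by omega)).1 :=
        (pv_mem_pairs nums _ (List.getElem_mem _)).1
      rw [hgt] at hval
      have hjeq : (((pvPairs nums)[jdx]'(by omega)).1).toNat = j := by
        have := congrArg Prod.fst hgt
        rw [hfst] at *
        omega
      rw [hjeq] at hval
      rw [hval, if_neg (by push_cast; omega)]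
      have hnv : nums[j] = ((pvPairs nums)[jdx]'(by omega)).2 := by
        have hv := (pv_mem_pairs nums _ (List.getElem_mem (by omega : jdx < (pvPairs nums).length))).2.2
        rw [hfst] at hv
        rw [PySem.List.pyGetD_natCast, List.getD_eq_getElem _ _ hjn] at hv
        exact hv
      have hmin : min nums[j] L = L := by omega
      omega
    · rw [hu j hmem]
      have hlt : ¬ (L < nums[j]) := by
        intro hcon
        exact hmem (pv_fst_take_mem_of_gt nums L m hm1 j hjn hcon)
      have hmin : min nums[j] L = nums[j] := by omega
      rw [List.getD_eq_getElem _ 0 (by simpa using hjn), List.getElem_replicate]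
      omega

-- ---------- sum identities ----------
theorem pv_sum_map_sub_pair (Lf : Int) :
    ∀ (tk : List (Int × Int)),
      (tk.map (fun p => p.2 - Lf)).sum = (tk.map Prod.snd).sum - (tk.length : Int) * Lf := by
  intro tk
  induction tk with
  | nil => simp
  | cons p t ih =>
    simp only [List.map_cons, List.sum_cons, List.length_cons, ih]
    push_cast
    ring

theorem pv_take_all_ge (nums : List Int) (L : Int) :
    ∀ p ∈ (pvPairs nums).take (pvCnt nums L), L ≤ p.2 := by
  intro p hp
  have hcq : pvCnt nums L = (pvPairs nums).countP (fun p => decide (L ≤ p.2)) := rfl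
  rw [hcq, pv_desc_take_countP _ (pv_mono_le L) _ (pv_pairs_desc nums)] at hp
  simpa using List.of_mem_filter hp

theorem pv_drop_all_lt (nums : List Int) (L : Int) :
    ∀ p ∈ (pvPairs nums).drop (pvCnt nums L), p.2 < L := by
  have happ := List.take_append_drop (pvCnt nums L) (pvPairs nums)
  have hcnt : ((pvPairs nums).take (pvCnt nums L)).countP (fun p => decide (L ≤ p.2))
      + ((pvPairs nums).drop (pvCnt nums L)).countP (fun p => decide (L ≤ p.2))
      = (pvPairs nums).countP (fun p => decide (L ≤ p.2)) := by
    rw [← List.countP_append, happ]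
  have htlen : ((pvPairs nums).take (pvCnt nums L)).length = pvCnt nums L := by
    rw [List.length_take]
    have := pv_cnt_le_length nums L
    omega
  have htfull : ((pvPairs nums).take (pvCnt nums L)).countP (fun p => decide (L ≤ p.2))
      = ((pvPairs nums).take (pvCnt nums L)).length :=
    List.countP_eq_length.mpr (fun p hp => by simpa using pv_take_all_ge nums L p hp)
  have hdz : ((pvPairs nums).drop (pvCnt nums L)).countP (fun p => decide (L ≤ p.2)) = 0 := by
    have hcq : pvCnt nums L = (pvPairs nums).countP (fun p => decide (L ≤ p.2)) := rfl
    omega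
  rw [List.countP_eq_zero] at hdz
  intro p hp
  have := hdz p hp
  simp at this
  omega

theorem pv_sum_min_over (nums : List Int) (L M : Int)
    (htake : ∀ p ∈ (pvPairs nums).take (pvCnt nums L), min p.2 M = M)
    (hdrop : ∀ p ∈ (pvPairs nums).drop (pvCnt nums L), min p.2 M = p.2) :
    (nums.map (fun v => min v M)).sum
      = (pvCnt nums L : Int) * M + (((pvPairs nums).drop (pvCnt nums L)).map Prod.snd).sum := by
  have hperm : (((pvPairs nums).map Prod.snd).map (fun v => min v M)).Perm (nums.map (fun v => min v M)) :=
    (pv_pairs_snd_perm nums).map _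
  rw [← hperm.sum_eq]
  conv_lhs => rw [← List.take_append_drop (pvCnt nums L) (pvPairs nums)]
  rw [List.map_append, List.map_append, List.sum_append]
  have htlen : ((pvPairs nums).take (pvCnt nums L)).length = pvCnt nums L := by
    rw [List.length_take]
    have := pv_cnt_le_length nums L
    omega
  have h1 : (((pvPairs nums).take (pvCnt nums L)).map Prod.snd).map (fun v => min v M)
      = ((pvPairs nums).take (pvCnt nums L)).map (fun _ => M) := by
    rw [List.map_map]
    exact List.map_congr_left (fun p hp => htake p hp)
  have h2 : (((pvPairs nums).drop (pvCnt nums L)).map Prod.snd).map (fun v => min v M)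
      = ((pvPairs nums).drop (pvCnt nums L)).map Prod.snd := by
    rw [List.map_map]
    exact List.map_congr_left (fun p hp => hdrop p hp)
  rw [h1, h2, List.map_const', List.sum_replicate, htlen]
  simp [nsmul_eq_mul]

theorem pv_sum_pairs_snd (nums : List Int) :
    (((pvPairs nums).take (pvCnt nums L)).map Prod.snd).sum
      + (((pvPairs nums).drop (pvCnt nums L)).map Prod.snd).sum = nums.sum := by
  rw [← List.sum_append, ← List.map_append, List.take_append_drop]
  exact (pv_pairs_snd_perm nums).sum_eq

-- ---------- A's current list and final verification ----------
theorem pv_cur_from_sub (nums : List Int) (L : Int) :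
    (PySem.List.pyRange 0 (PySem.List.len nums)).map
        (fun i => PySem.List.pyGetD nums i 0 - PySem.List.pyGetD (pvSub nums L) i 0)
      = pvCur nums L := by
  rw [pvSub, pv_current_eq nums (fun v => v - min v L), pvCur]
  exact List.map_congr_left (fun v _ => by omega)

theorem pv_range_map_getD (nums S : List Int) (hlen : S.length = nums.length) :
    (PySem.List.pyRange 0 (PySem.List.len nums)).map
        (fun i => PySem.List.pyGetD nums i 0 - PySem.List.pyGetD S i 0)
      = (List.range nums.length).map (fun j => nums.getD j 0 - S.getD j 0) := by
  rw [PySem.List.len_eq, PySem.List.pyRange_zero_nat, List.map_map]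
  refine List.map_congr_left ?_
  intro j hj
  rw [List.mem_range] at hj
  simp only [Function.comp_apply]
  rw [PySem.List.pyGetD_natCast, PySem.List.pyGetD_natCast]

theorem pv_sum_range_getD (l : List Int) :
    ((List.range l.length).map (fun j => l.getD j 0)).sum = l.sum := by
  induction l with
  | nil => simp
  | cons x t ih =>
    rw [List.length_cons, List.range_succ_eq_map, List.map_cons, List.map_map]
    simp only [List.getD_cons_zero, List.sum_cons]
    have : ((List.range t.length).map (fun j => (x :: t).getD (j + 1) 0))
        = (List.range t.length).map (fun j => t.getD j 0) :=
      List.map_congr_left (fun j _ => by simp)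
    have hcomp : (fun j => (x :: t).getD j 0) ∘ Nat.succ = fun j => (x :: t).getD (j + 1) 0 := rfl
    rw [hcomp, this, ih]

theorem pv_sum_map_sub_fun (f g : Nat → Int) :
    ∀ (l : List Nat), (l.map (fun j => f j - g j)).sum = (l.map f).sum - (l.map g).sum := by
  intro l
  induction l with
  | nil => simp
  | cons x t ih => simp only [List.map_cons, List.sum_cons, ih]; ring

theorem pv_result_sum (nums S : List Int) (hlen : S.length = nums.length) :
    ((List.range nums.length).map (fun j => nums.getD j 0 - S.getD j 0)).sum
      = nums.sum - S.sum := by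
  rw [pv_sum_map_sub_fun]
  rw [pv_sum_range_getD nums]
  rw [← hlen, pv_sum_range_getD S]

theorem pv_result_nonneg (nums S : List Int)
    (hb : ∀ j : Nat, j < nums.length → S.getD j 0 ≤ nums.getD j 0) :
    ((List.range nums.length).map (fun j => nums.getD j 0 - S.getD j 0)).any
      (fun r => r < 0) = false := by
  rw [List.any_eq_false]
  intro r hr
  rw [List.mem_map] at hr
  obtain ⟨j, hj, rfl⟩ := hr
  rw [List.mem_range] at hj
  have := hb j hj
  simp only [decide_eq_true_eq]
  omega

-- ---------- small remaining helpers ----------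
theorem pv_sub_sum (nums : List Int) (L : Int) :
    (pvSub nums L).sum = nums.sum - (nums.map (fun v => min v L)).sum := by
  rw [pvSub]
  induction nums with
  | nil => simp
  | cons x t ih => simp only [List.map_cons, List.sum_cons, ih]; ring

theorem pv_build_length (nums : List Int) (m : Nat) (Lf rf : Int) :
    (pvBuild nums m Lf rf).length = nums.length := by
  rw [pvBuild, pv_bld_len]
  simp [PySem.List.pyRepeat_singleton, PySem.List.len_eq]

theorem pv_getD_eq_getElem_nums (nums : List Int) (j : Nat) (hj : j < nums.length) :
    nums.getD j 0 = nums[j] := List.getD_eq_getElem _ _ hj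

-- ---------- the main lock-step induction ----------
theorem pv_main (nums : List Int) (T : Int) (hpos : ∀ v ∈ nums, 0 ≤ v) (hT : 0 ≤ T)
    (rem L : Int) (m : Nat)
    (hrem : 0 ≤ rem) (hL : 0 ≤ L)
    (hex : ∃ v ∈ nums, L ≤ v)
    (hm1 : pvCntGT nums L ≤ m) (hm2 : m ≤ pvCnt nums L)
    (hsum : (nums.map (fun v => min v L)).sum = T + rem) :
    ∃ S : List Int,
      pvAloop nums (pvSub nums L) rem = some S
      ∧ S = pvBuild nums (pvBloop (pvPairs nums) m L rem 0).1
          (pvBloop (pvPairs nums) m L rem 0).2.1 (pvBloop (pvPairs nums) m L rem 0).2.2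
      ∧ S.length = nums.length
      ∧ S.sum = nums.sum - T
      ∧ (∀ j : Nat, j < nums.length → S.getD j 0 ≤ nums.getD j 0) := by
  by_cases h0 : rem ≤ 0
  · -- loop exits immediately
    refine ⟨pvSub nums L, ?_, ?_, pv_sub_length nums L, ?_, ?_⟩
    · rw [pvAloop, if_pos h0]
    · rw [pvBloop, if_pos h0, (pv_build_eq_sub nums L m hm1 hm2)]
    · rw [pv_sub_sum, hsum]
      omega
    · intro j hj
      rw [pv_sub_getD _ _ _ hj, pv_getD_eq_getElem_nums _ _ hj]
      have := hpos nums[j] (List.getElem_mem _)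
      omega
  · -- one more iteration
    obtain ⟨t, hUe⟩ := pv_U_head nums L hex
    have hcur : pvAcurrent nums (pvSub nums L) = pvCur nums L := by
      rw [pvAcurrent]; exact pv_cur_from_sub nums L
    have hUeq : pvAunique nums (pvSub nums L)
        = PySem.List.sorted (PySem.Set.ofList (pvCur nums L)) (fun v => v) true := by
      rw [pvAunique, hcur]
    have hU : pvAunique nums (pvSub nums L) = L :: t := by rw [hUeq, hUe]
    have hcv : pvAcv nums (pvSub nums L) = L := by
      rw [pvAcv, hU, PySem.List.pyGetD_zero_cons]
    have hnv : pvAnv nums (pvSub nums L) = pvNxt nums L := by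
      rw [pvAnv, hUeq]
      exact pv_U_next nums L hL hex
    have hidx : pvAidx nums (pvSub nums L) = ((pvPairs nums).take (pvCnt nums L)).map Prod.fst := by
      rw [pvAidx, hcur, hcv]
      exact pv_indices_eq nums L
    have hplen := pv_pairs_length nums
    have hcle := pv_cnt_le_length nums L
    have hcnt_len : PySem.List.len (pvAidx nums (pvSub nums L)) = (pvCnt nums L : Int) := by
      rw [hidx, PySem.List.len_eq, List.length_map, List.length_take]
      have hmin : min (pvCnt nums L) (pvPairs nums).length = pvCnt nums L := by omega
      rw [hmin]
    have hred : pvAred nums (pvSub nums L) = L - pvNxt nums L := by rw [pvAred, hcv, hnv]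
    have htotred : pvAtotred nums (pvSub nums L) = (L - pvNxt nums L) * (pvCnt nums L : Int) := by
      rw [pvAtotred, hred, hcnt_len]
    have hN0 : 0 ≤ pvNxt nums L := by
      rcases pv_nxt_mem_or nums L with h | h
      · omega
      · exact hpos _ h
    have hNmax := pv_nxt_max nums L
    have hcnt1 : 1 ≤ pvCnt nums L := by
      obtain ⟨v, hv, hLv⟩ := hex
      obtain ⟨j, hj, rfl⟩ := List.getElem_of_mem hv
      obtain ⟨jdx, hjdx, heq⟩ := List.getElem_of_mem (pv_pair_at nums j hj)
      have := (pv_desc_getElem_iff _ (pv_mono_le L) (pvPairs nums) (pv_pairs_desc nums) jdx hjdx).mp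
        (by rw [heq]; simp only [decide_eq_true_eq]; exact hLv)
      have hcq : pvCnt nums L = (pvPairs nums).countP (fun p => decide (L ≤ p.2)) := rfl
      omega
    have hNlt : pvNxt nums L < L := by
      by_cases hc : pvCnt nums L < (pvPairs nums).length
      · exact pv_nxt_lt nums L hc
      · have hall := pv_all_ge_of_cnt_eq nums L hc
        have hmin : nums.map (fun v => min v L) = nums.map (fun _ => L) :=
          List.map_congr_left (fun v hv => by have := hall v hv; omega)
        rw [hmin, List.map_const', List.sum_replicate, nsmul_eq_mul] at hsum
        have hNz : pvNxt nums L = 0 := by rw [pvNxt, dif_neg hc]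
        have hn0 : (0 : Int) ≤ (nums.length : Int) := by positivity
        nlinarith
    have htrpos : 0 < pvAtotred nums (pvSub nums L) := by
      rw [htotred]
      have h1 : 0 < L - pvNxt nums L := by omega
      have h2 : (0 : Int) < (pvCnt nums L : Int) := by exact_mod_cast hcnt1
      positivity
    have hm' : pvExtend (pvPairs nums) L m = pvCnt nums L :=
      pv_extend_eq _ (pv_pairs_desc nums) L m hm1 hm2
    have hbnxt : pvBnxt (pvPairs nums) L m = pvNxt nums L := by
      simp only [pvBnxt, hm', pvNxt]
    have hbdrop : pvBdrop (pvPairs nums) L m = (L - pvNxt nums L) * (pvCnt nums L : Int) := by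
      simp only [pvBdrop, hbnxt, hm']
    have hUne : ¬ pvAunique nums (pvSub nums L) = [] := by rw [hU]; simp
    have hA := pv_sum_min_over nums L L
      (fun p hp => by have := pv_take_all_ge nums L p hp; omega)
      (fun p hp => by have := pv_drop_all_lt nums L p hp; omega)
    by_cases htr2 : pvAtotred nums (pvSub nums L) ≤ rem
    · -- full leveling step: recurse
      have hdec : 0 < (L - pvNxt nums L) * (pvCnt nums L : Int) := htotred ▸ htrpos
      have hupd : pvAupdate nums (pvSub nums L) = pvSub nums (pvNxt nums L) := by
        rw [pvAupdate, hidx, hred]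
        exact pv_update_if nums L (pvNxt nums L) hNlt hNmax
      -- sum bookkeeping
      have hB := pv_sum_min_over nums L (pvNxt nums L)
        (fun p hp => by have := pv_take_all_ge nums L p hp; omega)
        (fun p hp => by
          have h1 := pv_drop_all_lt nums L p hp
          have h2 : p.2 ∈ nums := (pv_pairs_snd_perm nums).mem_iff.mp
            (List.mem_map.mpr ⟨p, (List.drop_sublist _ _).mem hp, rfl⟩)
          have := hNmax p.2 h2 h1
          omega)
      have hdist : (pvCnt nums L : Int) * L - (pvCnt nums L : Int) * (pvNxt nums L)
          = (L - pvNxt nums L) * (pvCnt nums L : Int) := by ring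
      have hsum' : (nums.map (fun v => min v (pvNxt nums L))).sum
          = T + (rem - (L - pvNxt nums L) * (pvCnt nums L : Int)) := by omega
      obtain ⟨S, hSA, hSB, hSl, hSs, hSb⟩ := pv_main nums T hpos hT
        (rem - (L - pvNxt nums L) * (pvCnt nums L : Int)) (pvNxt nums L) (pvCnt nums L)
        (by omega) hN0
        (by obtain ⟨v, hv, hLv⟩ := hex; exact ⟨v, hv, by omega⟩)
        (by
          refine List.countP_mono_left ?_
          intro p hp hgt
          simp only [decide_eq_true_eq] at hgt ⊢
          have h2 : p.2 ∈ nums := (pv_pairs_snd_perm nums).mem_iff.mp (List.mem_map.mpr ⟨p, hp, rfl⟩)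
          by_contra hcon
          have := hNmax p.2 h2 (by omega)
          omega)
        (by
          refine List.countP_mono_left ?_
          intro p hp hge
          simp only [decide_eq_true_eq] at hge ⊢
          omega)
        hsum'
      refine ⟨S, ?_, ?_, hSl, hSs, hSb⟩
      · rw [pvAloop, if_neg h0, if_neg hUne, if_neg (by omega), if_pos htr2, hupd, htotred]
        exact hSA
      · rw [pvBloop, if_neg h0, if_pos (by rw [hbdrop, ← htotred]; exact htr2),
          if_neg (by rw [hbdrop]; omega), hm', hbnxt, hbdrop]
        exact hSB
    · -- final distribution step
      have hcnt0 : ((pvCnt nums L : Int)) ≠ 0 := by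
        have : (0 : Int) < (pvCnt nums L : Int) := by exact_mod_cast hcnt1
        omega
      have hcpos : (0 : Int) < (pvCnt nums L : Int) := by exact_mod_cast hcnt1
      have hdm : PySem.Int.divmod? rem ((pvCnt nums L : Int))
          = some (PySem.Int.floordiv rem (pvCnt nums L : Int), PySem.Int.mod rem (pvCnt nums L : Int)) := by
        unfold PySem.Int.divmod?
        rw [if_neg hcnt0]
        rfl
      have hq := PySem.Int.floordiv_mul_add_mod rem ((pvCnt nums L : Int))
      have hrm0 := PySem.Int.mod_nonneg rem hcpos
      have hrmlt := PySem.Int.mod_lt rem hcpos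
      have hq0 : 0 ≤ PySem.Int.floordiv rem (pvCnt nums L : Int) := by
        by_contra hcon
        have h1 : PySem.Int.floordiv rem (pvCnt nums L : Int) ≤ -1 := by omega
        have h2 : PySem.Int.floordiv rem (pvCnt nums L : Int) * (pvCnt nums L : Int)
            ≤ -1 * (pvCnt nums L : Int) := by
          exact mul_le_mul_of_nonneg_right h1 (by omega)
        omega
      have hqlt : PySem.Int.floordiv rem (pvCnt nums L : Int) < L - pvNxt nums L := by
        by_contra hcon
        have h1 : (L - pvNxt nums L) * (pvCnt nums L : Int)
            ≤ PySem.Int.floordiv rem (pvCnt nums L : Int) * (pvCnt nums L : Int) := by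
          exact mul_le_mul_of_nonneg_right (by omega) (by omega)
        rw [htotred] at htr2
        omega
      have hgtle : pvCntGT nums L ≤ pvCnt nums L :=
        List.countP_mono_left (fun p _ h => by simp only [decide_eq_true_eq] at h ⊢; omega)
      have hzn : (PySem.List.len nums).toNat = nums.length := by simp [PySem.List.len_eq]
      have htklen : ((pvPairs nums).take (pvCnt nums L)).length = pvCnt nums L := by
        rw [List.length_take]; omega
      have hrange : ∀ p ∈ (pvPairs nums).take (pvCnt nums L),
          0 ≤ p.1 ∧ p.1 < ((List.replicate nums.length (0 : Int)).length : Int) := by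
        intro p hp
        have := pv_mem_pairs nums p ((List.take_sublist _ _).mem hp)
        rw [List.length_replicate]
        exact ⟨this.1, this.2.1⟩
      have hvals : ∀ p ∈ (pvPairs nums).take (pvCnt nums L),
          nums.getD p.1.toNat 0 = p.2 := by
        intro p hp
        have hmp := pv_mem_pairs nums p ((List.take_sublist _ _).mem hp)
        have hcast : ((p.1.toNat : Nat) : Int) = p.1 := Int.toNat_of_nonneg hmp.1
        have := hmp.2.2
        rw [← hcast, PySem.List.pyGetD_natCast] at this
        exact this
      have hz0 : ∀ p ∈ (pvPairs nums).take (pvCnt nums L),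
          (List.replicate nums.length (0 : Int)).getD p.1.toNat 0 = 0 := by
        intro p hp
        have h := hrange p hp
        rw [List.length_replicate] at h
        exact List.getD_replicate _ (by omega)
      have hdistr : pvAdistribute nums (pvSub nums L)
          (PySem.Int.floordiv rem (pvCnt nums L : Int)) (PySem.Int.mod rem (pvCnt nums L : Int))
          = pvBuild nums (pvCnt nums L)
              (L - PySem.Int.floordiv rem (pvCnt nums L : Int))
              (PySem.Int.mod rem (pvCnt nums L : Int)) := by
        rw [pvAdistribute, hidx, pvBuild, PySem.List.slice_to_natCast,
          PySem.List.pyRepeat_singleton, hzn]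
        refine pv_scat_ab L _ _ _ 0 _ _ ?_ (pv_take_fst_nodup nums _) hrange ?_ ?_
        · rw [pv_sub_length, List.length_replicate]
        · intro p hp
          have hmp := pv_mem_pairs nums p ((List.take_sublist _ _).mem hp)
          have hjn : p.1.toNat < nums.length := by omega
          rw [pv_sub_getD _ _ _ hjn]
          have hv := hvals p hp
          rw [pv_getD_eq_getElem_nums _ _ hjn] at hv
          have hge := pv_take_all_ge nums L p hp
          have hmin : min nums[p.1.toNat] L = L := by omega
          omega
        · intro j hj hjm
          rw [List.length_replicate] at hj
          have hlt : ¬ (L < nums[j]'hj) := by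
            intro hcon
            exact hjm (pv_fst_take_mem_of_gt nums L _ hgtle j hj hcon)
          rw [pv_sub_getD _ _ _ hj,
            List.getD_eq_getElem _ 0 (by rw [List.length_replicate]; exact hj),
            List.getElem_replicate]
          have hmin : min nums[j] L = nums[j] := by omega
          omega
      refine ⟨pvBuild nums (pvCnt nums L)
          (L - PySem.Int.floordiv rem (pvCnt nums L : Int))
          (PySem.Int.mod rem (pvCnt nums L : Int)), ?_, ?_, pv_build_length nums _ _ _, ?_, ?_⟩
      · rw [pvAloop, if_neg h0, if_neg hUne, if_neg (by omega), if_neg htr2, hcnt_len, hdm]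
        show pvAloop nums (pvAdistribute nums (pvSub nums L)
            (PySem.Int.floordiv rem (pvCnt nums L : Int)) (PySem.Int.mod rem (pvCnt nums L : Int)))
          (rem - pvAtotred nums (pvSub nums L)) = _
        rw [pvAloop, if_pos (by omega), hdistr]
      · rw [pvBloop, if_neg h0, if_neg (by rw [hbdrop, ← htotred]; exact htr2), hm', hdm]
      · rw [pvBuild, PySem.List.slice_to_natCast, PySem.List.pyRepeat_singleton, hzn]
        rw [pv_bld_sum _ _ _ 0 _ (pv_take_fst_nodup nums _) hrange hz0, pv_sum_map_sub_pair]
        have hsplit := pv_sum_pairs_snd nums (L := L)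
        have hrepl : (List.replicate nums.length (0 : Int)).sum = 0 := by simp
        rw [hrepl, htklen]
        have hco : (pvCnt nums L : Int) * (L - PySem.Int.floordiv rem (pvCnt nums L : Int))
            = (pvCnt nums L : Int) * L
              - PySem.Int.floordiv rem (pvCnt nums L : Int) * (pvCnt nums L : Int) := by ring
        omega
      · intro j hj
        rw [pvBuild, PySem.List.slice_to_natCast, PySem.List.pyRepeat_singleton, hzn]
        refine pv_bld_bnd _ _ (fun j => nums.getD j 0) _ 0 _ hrange ?_ ?_ j
          (by rw [List.length_replicate]; exact hj)
        · intro j' hj'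
          rw [List.length_replicate] at hj'
          beta_reduce
          rw [List.getD_eq_getElem _ 0 (by rw [List.length_replicate]; exact hj'),
            List.getElem_replicate, pv_getD_eq_getElem_nums _ _ hj']
          exact hpos _ (List.getElem_mem _)
        · intro p hp pos
          have hv := hvals p hp
          beta_reduce
          rw [hv]
          by_cases hp' : pos < PySem.Int.mod rem (pvCnt nums L : Int)
          · rw [if_pos hp']; omega
          · rw [if_neg hp']; omega
  termination_by rem.toNat
  decreasing_by omega

-- ---------- top level ----------
theorem pv_top (nums : List Int) (k : Int) :
    treasury_withdrawal_amounts nums k = treasury_withdrawal_amounts_alt nums k := by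
  by_cases hval : nums = [] ∨ k ≤ 0 ∨ nums.any (fun v => v < 0) = true
  · rw [treasury_withdrawal_amounts, if_pos hval, treasury_withdrawal_amounts_alt,
      if_pos (by rcases hval with h | h | h; exacts [Or.inl h, Or.inr (Or.inl h), Or.inr (Or.inr (Or.inl h))])]
  · push_neg at hval
    obtain ⟨hne, hk, hanyneg⟩ := hval
    have hpos : ∀ v ∈ nums, 0 ≤ v := by
      intro v hv
      by_contra hcon
      have : nums.any (fun v => v < 0) = true := List.any_eq_true.mpr ⟨v, hv, by simp; omega⟩
      exact hanyneg this
    by_cases hsumlt : nums.sum < k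
    · rw [treasury_withdrawal_amounts, if_neg (by push_neg; exact ⟨hne, hk, hanyneg⟩),
        if_pos hsumlt, treasury_withdrawal_amounts_alt, if_pos (Or.inr (Or.inr (Or.inr hsumlt)))]
    · -- the real case
      have hplen := pv_pairs_length nums
      have hnlen : 0 < nums.length := List.length_pos_iff.mpr hne
      rcases hp : pvPairs nums with _ | ⟨p0, rest⟩
      · rw [hp] at hplen; simp at hplen; omega
      have hmaxv : ∀ v ∈ nums, v ≤ p0.2 := by
        intro v hv
        have : v ∈ (pvPairs nums).map Prod.snd := (pv_pairs_snd_perm nums).mem_iff.mpr hv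
        rw [hp, List.map_cons, List.mem_cons] at this
        rcases this with h | h
        · omega
        · rw [List.mem_map] at h
          obtain ⟨q, hq, rfl⟩ := h
          have hd := pv_pairs_desc nums
          rw [hp] at hd
          exact List.rel_of_pairwise_cons hd hq
      have hL0mem : p0.2 ∈ nums := by
        refine (pv_pairs_snd_perm nums).mem_iff.mp ?_
        rw [hp]; simp
      have hL0pos : 0 ≤ p0.2 := hpos _ hL0mem
      have hrepl : PySem.List.pyRepeat [(0 : Int)] (PySem.List.len nums) = pvSub nums p0.2 := by
        rw [PySem.List.pyRepeat_singleton]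
        have hzn : (PySem.List.len nums).toNat = nums.length := by simp [PySem.List.len_eq]
        rw [hzn]
        symm
        rw [List.eq_replicate_iff]
        refine ⟨pv_sub_length nums _, ?_⟩
        intro x hx
        rw [pvSub, List.mem_map] at hx
        obtain ⟨v, hv, rfl⟩ := hx
        have := hmaxv v hv
        omega
      have hm1 : pvCntGT nums p0.2 ≤ 0 := by
        have : pvCntGT nums p0.2 = 0 := by
          rw [pvCntGT, List.countP_eq_zero]
          intro q hq
          have : q.2 ∈ nums := (pv_pairs_snd_perm nums).mem_iff.mp (List.mem_map.mpr ⟨q, hq, rfl⟩)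
          have := hmaxv _ this
          simp only [decide_eq_true_eq]
          omega
        omega
      have hsum0 : (nums.map (fun v => min v p0.2)).sum = (nums.sum - k) + k := by
        have : nums.map (fun v => min v p0.2) = nums.map (fun v => v) :=
          List.map_congr_left (fun v hv => by have := hmaxv v hv; omega)
        rw [this, List.map_id']
        ring
      obtain ⟨S, hSA, hSB, hSl, hSs, hSb⟩ := pv_main nums (nums.sum - k) hpos (by omega)
        k p0.2 0 (by omega) hL0pos ⟨p0.2, hL0mem, le_refl _⟩ hm1 (Nat.zero_le _) hsum0
      have hL0arg : (PySem.List.pyGetD (pvPairs nums) 0 ((0 : Int), (0 : Int))).2 = p0.2 := by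
        rw [hp, PySem.List.pyGetD_zero_cons]
      rw [treasury_withdrawal_amounts, if_neg (by push_neg; exact ⟨hne, hk, hanyneg⟩),
        if_neg hsumlt, if_neg (by omega), hrepl, hSA]
      rw [treasury_withdrawal_amounts_alt,
        if_neg (by push_neg; exact ⟨hne, hk, hanyneg, by omega⟩), hL0arg]
      show (if (pvAcurrent nums S).any (fun r => r < 0) = true ∨ (pvAcurrent nums S).sum ≠ nums.sum - k
          then ([] : List Int) else S) = _
      rw [pvAcurrent, pv_range_map_getD nums S hSl]
      rw [if_neg (by
        push_neg
        refine ⟨?_, ?_⟩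
        · intro hc
          rw [pv_result_nonneg nums S (fun j hj => hSb j hj)] at hc
          exact absurd hc (by simp)
        · rw [pv_result_sum nums S hSl, hSs]
          ring)]
      exact hSB

-- ===== VERDICT (by name: the statement is the Claim_ definition above) =====
theorem treasury_withdrawal_amounts_spec : Claim_equal_treasury_withdrawal_amounts := by
  intro nums k _
  show treasury_withdrawal_amounts nums k = treasury_withdrawal_amounts_alt nums k
  exact pv_top nums k
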